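-- pv_equiv track=rewrite | github.com/Kacperon/Projekty | ASD/2etap/zad4/zad4 copy 2.py | Flight
-- ===== SOURCE A (Python) =====
-- from collections import deque
--
-- def BFS(G, x, y):
--     n = len(G) # len(V)
--     Q = deque()
--     visited = [False for v in range(n)]
--     visited[x] = True
--     Q.append(x)
--     while len(Q) > 0 and not visited[y]:
--         u = Q.popleft()
--         for v in G[u]: # dla każdego sąsiada u
--             if not visited[v]:
--                 visited[v] = True
--                 Q.append(v)
--     return visited[y]
--
-- def Flight(L,x,y,t):
--
--   E=len(L)
--   n=max(u[1] for u in L)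
--   n=max(n,y,x)
--   G=[[]for _ in range(n+1)]
--   L=sorted(L, key=lambda x: x[2])
--   i,j=0,0
--
--   while j<E and L[j][2]-L[i][2]<=2*t:
--     G[L[j][0]].append(L[j][1])
--     G[L[j][1]].append(L[j][0])
--     j+=1
--   flag=False
--   bfs_flag=True
--
--   while not flag and j<E+1 and i<E:
--
--     if bfs_flag and G[y]!=[] and G[x]!=[]:
--       flag=BFS(G,x,y)
--       bfs_flag=False
--       #end if
--     G[L[i][0]].remove(L[i][1])
--     G[L[i][1]].remove(L[i][0])
--     i+=1
--     while j<E and L[j][2]-L[i][2]<=2*t: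
--       G[L[j][0]].append(L[j][1])
--       G[L[j][1]].append(L[j][0])
--       j+=1
--       bfs_flag=True
--
--   return flag
-- ===== SOURCE B (Python) =====
-- def Flight(L, x, y, t):
--     n = max(max(b for _a, b, _w in L), x, y)
--     S = sorted(L, key=lambda e: e[2])
--     for i in range(len(S)):
--         lo = S[i][2]
--         window = [e for e in S[i:] if e[2] - lo <= 2 * t]
--         seen = [False] * (n + 1)
--         seen[x] = True
--         for _ in range(2 * len(window) + 1):
--             for a, b, _w in window:
--                 if seen[a]:
--                     seen[b] = True
--                 if seen[b]:
--                     seen[a] = True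
--         if seen[y]:
--             return True
--     return False
-- ===== Notes on version B (the rewrite author's own statement) =====
-- stated objective: alternative
-- what changed: B replaces A's incremental sliding-window graph (mutable adjacency lists maintained by append/remove, BFS with a deque and skip flags) by an independent check per sorted anchor: it filters the 2t-window out of the sorted edge list and marks the connected component of x by repeated relaxation sweeps directly over that edge list into a seen array, with no adjacency lists, no queue and no incremental state. Pre_ keeps all labels inside the vertex-array index range [-(n+1), n]; …
-- intended difference: When x and y denote the same seat of the vertex array (x % (n+1) == y % (n+1)) and no flight of L touches that vertex, A returns False because its G[x]!=[] guard suppresses the trivial self-connection, while B returns True, the intended answer since a vertex is always connected to itself by the empty path. — e.g. on Flight([(0, 1, 0)], 2, 2, 0): A returns false, B returns true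
-- outside the precondition, e.g. on Flight([(0, 2, 0)], -44, 5, 0): A returns False, B raises IndexError
import Mathlib
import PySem

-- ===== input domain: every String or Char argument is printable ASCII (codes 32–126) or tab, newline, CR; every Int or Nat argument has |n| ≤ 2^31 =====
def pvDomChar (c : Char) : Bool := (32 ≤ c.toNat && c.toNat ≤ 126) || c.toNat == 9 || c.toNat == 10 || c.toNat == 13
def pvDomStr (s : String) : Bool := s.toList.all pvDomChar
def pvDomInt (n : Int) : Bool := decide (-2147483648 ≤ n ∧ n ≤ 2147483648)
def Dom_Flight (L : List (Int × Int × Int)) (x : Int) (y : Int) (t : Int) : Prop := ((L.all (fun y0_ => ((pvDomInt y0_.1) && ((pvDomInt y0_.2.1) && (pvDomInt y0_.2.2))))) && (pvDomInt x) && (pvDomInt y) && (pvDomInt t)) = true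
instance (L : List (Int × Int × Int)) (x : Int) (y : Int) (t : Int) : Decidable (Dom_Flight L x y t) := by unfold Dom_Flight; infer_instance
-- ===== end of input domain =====

-- B replaces A's incremental sliding-window adjacency graph + BFS with an independent
-- per-window relaxation sweep over the sorted edge list into a seen array (alternative
-- decomposition, no speed claim); A mutates only its local graph copy, no argument mutation.

-- ===== PORT A =====
-- Python list indexing G[v] / visited[v]: a negative index counts from the end
-- (exact for -len <= v < len; Python raises outside that range)
def pvIdx (N : Nat) (v : Int) : Nat := if v < 0 then (v + N).toNat else v.toNat

def pvLGet (G : List (List Int)) (u : Int) : List Int := G.getD (pvIdx G.length u) []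

def pvAddEdge (G : List (List Int)) (a b : Int) : List (List Int) :=
  let G1 := G.set (pvIdx G.length a) (pvLGet G a ++ [b])
  G1.set (pvIdx G1.length b) (pvLGet G1 b ++ [a])

def pvRemoveEdge (G : List (List Int)) (a b : Int) : List (List Int) :=
  let G1 := G.set (pvIdx G.length a) ((PySem.List.remove? (pvLGet G a) b).getD (pvLGet G a))
  G1.set (pvIdx G1.length b) ((PySem.List.remove? (pvLGet G1 b) a).getD (pvLGet G1 b))

-- for v in G[u]: if not visited[v]: visited[v] = True; Q.append(v)
def pvBfsInner (visited : List Bool) (Q : List Int) : List Int → List Bool × List Int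
  | [] => (visited, Q)
  | v :: rest =>
    if visited.getD (pvIdx visited.length v) false then pvBfsInner visited Q rest
    else pvBfsInner (visited.set (pvIdx visited.length v) true) (Q ++ [v]) rest

-- while len(Q) > 0 and not visited[y]: u = Q.popleft(); <inner loop>
-- (fuel recursion; fuel |G|+1 bounds the iteration count on every input admitted by Pre_Flight)
def pvBfsLoop (G : List (List Int)) (y : Int) : Nat → List Bool → List Int → Bool
  | 0, visited, _ => visited.getD (pvIdx visited.length y) false
  | fuel+1, visited, Q =>
    if 0 < Q.length ∧ ¬ visited.getD (pvIdx visited.length y) false then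
      match Q with
      | [] => visited.getD (pvIdx visited.length y) false
      | u :: Qt =>
        let p := pvBfsInner visited Qt (pvLGet G u)
        pvBfsLoop G y fuel p.1 p.2
    else visited.getD (pvIdx visited.length y) false

def pvBFS (G : List (List Int)) (x y : Int) : Bool :=
  let visited := (List.replicate G.length false).set (pvIdx G.length x) true
  pvBfsLoop G y (G.length + 1) visited [x]

-- while j < E and L[j][2] - L[i][2] <= 2*t: add edge j; j += 1  (both such loops in A;
-- the Bool result records whether any edge was added = Python's bfs_flag assignment,
-- discarded by the caller for the first loop, which has no such assignment)
def pvAddLoop (S : List (Int × Int × Int)) (E : Nat) (twot ti : Int) :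
    Nat → List (List Int) → Nat → Bool → List (List Int) × Nat × Bool
  | 0, G, j, fl => (G, j, fl)
  | fuel+1, G, j, fl =>
    if j < E ∧ (S.getD j (0,0,0)).2.2 - ti ≤ twot then
      pvAddLoop S E twot ti fuel
        (pvAddEdge G (S.getD j (0,0,0)).1 (S.getD j (0,0,0)).2.1) (j+1) true
    else (G, j, fl)

-- while not flag and j < E+1 and i < E: …  (fuel recursion; i increases each pass, E+1 suffices)
def pvMainLoop (S : List (Int × Int × Int)) (E : Nat) (x y twot : Int) :
    Nat → List (List Int) → Nat → Nat → Bool → Bool → Bool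
  | 0, _, _, _, flag, _ => flag
  | fuel+1, G, i, j, flag, bfsf =>
    if ¬flag ∧ j < E + 1 ∧ i < E then
      let fb := if bfsf ∧ pvLGet G y ≠ [] ∧ pvLGet G x ≠ [] then (pvBFS G x y, false) else (flag, bfsf)
      let e := S.getD i (0,0,0)
      let G1 := pvRemoveEdge G e.1 e.2.1
      let r := pvAddLoop S E twot ((S.getD (i+1) (0,0,0)).2.2) (E - j) G1 j false
      pvMainLoop S E x y twot fuel r.1 (i+1) r.2.1 fb.1 (if r.2.2 then true else fb.2)
    else flag

def Flight (L : List (Int × Int × Int)) (x : Int) (y : Int) (t : Int) : Bool :=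
  let E := L.length
  let n0 := ((PySem.List.max? (L.map (fun u => u.2.1)) (fun v => v)).getD 0)
  let n := max (max n0 y) x
  let G0 : List (List Int) := List.replicate (n+1).toNat []
  let S := PySem.List.sorted L (fun e => e.2.2) false
  let r := pvAddLoop S E (2*t) ((S.getD 0 (0,0,0)).2.2) E G0 0 false
  pvMainLoop S E x y (2*t) (E+1) r.1 0 r.2.1 false true
-- ===== PORT B =====
-- if seen[a]: seen[b] = True  (first branch of B's relaxation step; list indexing = pvIdx)
def pvRelaxA (N : Nat) (s : List Bool) (e : Int × Int × Int) : List Bool :=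
  if s.getD (pvIdx N e.1) false then s.set (pvIdx N e.2.1) true else s

-- if seen[b]: seen[a] = True  (second branch, reading the updated seen)
def pvRelaxB (N : Nat) (s : List Bool) (e : Int × Int × Int) : List Bool :=
  if s.getD (pvIdx N e.2.1) false then s.set (pvIdx N e.1) true else s

def pvRelax (N : Nat) (s : List Bool) (e : Int × Int × Int) : List Bool :=
  pvRelaxB N (pvRelaxA N s e) e

-- for a, b, _w in window: …  (one sweep; N = len(seen) throughout)
def pvSweep (N : Nat) (w : List (Int × Int × Int)) (s : List Bool) : List Bool :=
  w.foldl (pvRelax N) s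

-- the body of B's for-loop for one anchor index i
def pvAltCheck (N : Nat) (S : List (Int × Int × Int)) (x y t : Int) (i : Nat) : Bool :=
  let lo := (S.getD i (0,0,0)).2.2
  let window := (S.drop i).filter (fun e => e.2.2 - lo ≤ 2*t)
  let seen0 := (List.replicate N false).set (pvIdx N x) true
  let seen := (List.range (2*window.length+1)).foldl (fun s _ => pvSweep N window s) seen0
  seen.getD (pvIdx N y) false

def Flight_alt (L : List (Int × Int × Int)) (x : Int) (y : Int) (t : Int) : Bool :=
  let n0 := ((PySem.List.max? (L.map (fun u => u.2.1)) (fun v => v)).getD 0)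
  let n := max (max n0 x) y
  let S := PySem.List.sorted L (fun e => e.2.2) false
  (List.range S.length).any (fun i => pvAltCheck (n+1).toNat S x y t i)

-- ===== PRECONDITION & SPEC =====
-- n is the greatest among x, y and the second components of L: stated declaratively
-- (an upper bound that is attained), not by re-running the programs' max computation
def pvTopOf (L : List (Int × Int × Int)) (x y n : Int) : Prop :=
  x ≤ n ∧ y ≤ n ∧ (∀ e ∈ L, e.2.1 ≤ n) ∧ (n = x ∨ n = y ∨ ∃ e ∈ L, e.2.1 = n)

-- Pre_ excludes exactly the inputs where A raises: an empty L (ValueError from max), t < 0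
-- (ValueError from list.remove on an empty adjacency list), a negative vertex universe
-- (n < 0: the adjacency array is empty and G[y] raises IndexError), and any label outside
-- Python's index range [-(n+1), n] (usually IndexError; on some such inputs A's lazily
-- evaluated guard never touches the out-of-range label and A returns False where B,
-- which always allocates and indexes its seen array, raises IndexError).
def Pre_Flight (L : List (Int × Int × Int)) (x : Int) (y : Int) (t : Int) : Prop :=
  L ≠ [] ∧ 0 ≤ t ∧
    ∃ n ∈ x :: y :: L.map (fun e => e.2.1), pvTopOf L x y n ∧ 0 ≤ n ∧
      -(n + 1) ≤ x ∧ -(n + 1) ≤ y ∧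
      ∀ e ∈ L, -(n + 1) ≤ e.1 ∧ e.1 ≤ n ∧ -(n + 1) ≤ e.2.1
instance (L : List (Int × Int × Int)) (x : Int) (y : Int) (t : Int) : Decidable (Pre_Flight L x y t) := by
  unfold Pre_Flight pvTopOf; infer_instance

def pvWitness_Flight : (List (Int × Int × Int)) × Int × Int × Int := ([(0, 1, 0)], 0, 1, 0)

-- When x and y denote the same seat of the vertex array (x % (n+1) = y % (n+1)) and no
-- flight of L touches that vertex, A returns False (its G[x]!=[] guard suppresses the
-- trivial self-connection) while B returns True, the intended answer since a vertex is
-- always connected to itself by the empty path.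
def D_Flight (L : List (Int × Int × Int)) (x : Int) (y : Int) (t : Int) : Prop :=
  ∃ n ∈ x :: y :: L.map (fun e => e.2.1), pvTopOf L x y n ∧
    x % (n + 1) = y % (n + 1) ∧
    ∀ e ∈ L, e.1 % (n + 1) ≠ x % (n + 1) ∧ e.2.1 % (n + 1) ≠ x % (n + 1)
instance (L : List (Int × Int × Int)) (x : Int) (y : Int) (t : Int) : Decidable (D_Flight L x y t) := by
  unfold D_Flight pvTopOf; infer_instance

def Spec_Flight (L : List (Int × Int × Int)) (x : Int) (y : Int) (t : Int) (out : Bool) : Prop :=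
  ¬ D_Flight L x y t → out = Flight_alt L x y t
instance (L : List (Int × Int × Int)) (x : Int) (y : Int) (t : Int) (out : Bool) : Decidable (Spec_Flight L x y t out) := by
  unfold Spec_Flight; infer_instance

def pvDiffWitness_Flight : (List (Int × Int × Int)) × Int × Int × Int := ([(0, 1, 0)], 2, 2, 0)
def pvDiffWitnessOut_Flight : Bool × Bool := (false, true)

-- ===== CLAIM (what is proved, stated in full; the proofs are below) =====
def Claim_unchanged_Flight : Prop := ∀ (L : List (Int × Int × Int)) (x : Int) (y : Int) (t : Int), Dom_Flight L x y t → Pre_Flight L x y t → Spec_Flight L x y t (Flight L x y t)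
def Claim_changed_Flight : Prop := Dom_Flight (pvDiffWitness_Flight.1) (pvDiffWitness_Flight.2.1) (pvDiffWitness_Flight.2.2.1) (pvDiffWitness_Flight.2.2.2) ∧ Pre_Flight (pvDiffWitness_Flight.1) (pvDiffWitness_Flight.2.1) (pvDiffWitness_Flight.2.2.1) (pvDiffWitness_Flight.2.2.2) ∧ D_Flight (pvDiffWitness_Flight.1) (pvDiffWitness_Flight.2.1) (pvDiffWitness_Flight.2.2.1) (pvDiffWitness_Flight.2.2.2) ∧ Flight (pvDiffWitness_Flight.1) (pvDiffWitness_Flight.2.1) (pvDiffWitness_Flight.2.2.1) (pvDiffWitness_Flight.2.2.2) = pvDiffWitnessOut_Flight.1 ∧ Flight_alt (pvDiffWitness_Flight.1) (pvDiffWitness_Flight.2.1) (pvDiffWitness_Flight.2.2.1) (pvDiffWitness_Flight.2.2.2) = pvDiffWitnessOut_Flight.2 ∧ pvDiffWitnessOut_Flight.1 ≠ pvDiffWitnessOut_Flight.2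
def Claim_exact_Flight : Prop := ∀ (L : List (Int × Int × Int)) (x : Int) (y : Int) (t : Int), Dom_Flight L x y t → Pre_Flight L x y t → D_Flight L x y t → Flight L x y t ≠ Flight_alt L x y t

-- ===== LEMMAS AND PROOFS =====
-- ---------- reachability over an edge list ----------
def pvAdjE (es : List (Int × Int × Int)) (a b : Int) : Prop :=
  ∃ e ∈ es, (e.1 = a ∧ e.2.1 = b) ∨ (e.1 = b ∧ e.2.1 = a)

inductive pvReach (es : List (Int × Int × Int)) (x : Int) : Int → Prop
  | refl : pvReach es x x
  | step {a b : Int} : pvReach es x a → pvAdjE es a b → pvReach es x b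

theorem pvAdjE_symm {es : List (Int × Int × Int)} {a b : Int} (h : pvAdjE es a b) : pvAdjE es b a := by
  obtain ⟨e, he, h⟩ := h; exact ⟨e, he, h.symm⟩

theorem pvAdjE_mono {es es' : List (Int × Int × Int)} {a b : Int}
    (hs : ∀ e ∈ es, e ∈ es') (h : pvAdjE es a b) : pvAdjE es' a b := by
  obtain ⟨e, he, h⟩ := h; exact ⟨e, hs e he, h⟩

theorem pvReach_mono {es es' : List (Int × Int × Int)} {x v : Int}
    (hs : ∀ e ∈ es, e ∈ es') (h : pvReach es x v) : pvReach es' x v := by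
  induction h with
  | refl => exact pvReach.refl
  | step _ hadj ih => exact pvReach.step ih (pvAdjE_mono hs hadj)

theorem pvReach_first {es : List (Int × Int × Int)} {x y : Int}
    (h : pvReach es x y) (hne : x ≠ y) : ∃ b, pvAdjE es x b := by
  induction h with
  | refl => exact absurd rfl hne
  | @step a b hr hadj ih =>
    by_cases hax : a = x
    · exact ⟨b, hax ▸ hadj⟩
    · exact ih (fun hxa => hax hxa.symm)

theorem pvReach_last {es : List (Int × Int × Int)} {x y : Int}
    (h : pvReach es x y) (hne : x ≠ y) : ∃ a, pvAdjE es a y := by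
  cases h with
  | refl => exact absurd rfl hne
  | step hr hadj => exact ⟨_, hadj⟩
-- ---------- proof-side saturation over a set of labels (abstract model of B's sweeps) ----------
def pvSatPass (window : List (Int × Int × Int)) (comp : PySem.Set Int) : PySem.Set Int :=
  window.foldl (fun nxt e =>
    let nxt1 := if PySem.Set.contains comp e.1 then PySem.Set.add nxt e.2.1 else nxt
    if PySem.Set.contains comp e.2.1 then PySem.Set.add nxt1 e.1 else nxt1) comp
-- ---------- B side: the saturation computes reachability ----------
theorem mem_satPass_aux (w : List (Int × Int × Int)) (c : PySem.Set Int) (v : Int) :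
    ∀ acc : PySem.Set Int, (v ∈ w.foldl (fun nxt e =>
      let nxt1 := if PySem.Set.contains c e.1 then PySem.Set.add nxt e.2.1 else nxt
      if PySem.Set.contains c e.2.1 then PySem.Set.add nxt1 e.1 else nxt1) acc) ↔
    v ∈ acc ∨ ∃ e ∈ w, (e.1 ∈ c ∧ v = e.2.1) ∨ (e.2.1 ∈ c ∧ v = e.1) := by
  induction w with
  | nil => simp
  | cons e w ih =>
    intro acc
    have hstep : ∀ acc2 : PySem.Set Int, (v ∈ (
        let nxt1 := if PySem.Set.contains c e.1 then PySem.Set.add acc2 e.2.1 else acc2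
        if PySem.Set.contains c e.2.1 then PySem.Set.add nxt1 e.1 else nxt1)) ↔
        v ∈ acc2 ∨ (e.1 ∈ c ∧ v = e.2.1) ∨ (e.2.1 ∈ c ∧ v = e.1) := by
      intro acc2
      show (v ∈ if PySem.Set.contains c e.2.1 then PySem.Set.add (if PySem.Set.contains c e.1 then PySem.Set.add acc2 e.2.1 else acc2) e.1 else (if PySem.Set.contains c e.1 then PySem.Set.add acc2 e.2.1 else acc2)) ↔ _
      split_ifs with h2 h1 h1 <;>
        (try simp only [PySem.Set.contains_iff] at h1 h2) <;>
        (try simp only [PySem.Set.mem_add]) <;> tauto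
    rw [List.foldl_cons, ih, hstep]
    constructor
    · rintro ((h | h) | ⟨f, hf, hor⟩)
      · exact Or.inl h
      · exact Or.inr ⟨e, List.mem_cons_self, h⟩
      · exact Or.inr ⟨f, List.mem_cons_of_mem _ hf, hor⟩
    · rintro (h | ⟨f, hf, hor⟩)
      · exact Or.inl (Or.inl h)
      · rcases List.mem_cons.1 hf with rfl | hf
        · exact Or.inl (Or.inr hor)
        · exact Or.inr ⟨f, hf, hor⟩

theorem mem_satPass (w : List (Int × Int × Int)) (c : PySem.Set Int) (v : Int) :
    v ∈ pvSatPass w c ↔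
      v ∈ c ∨ ∃ e ∈ w, (e.1 ∈ c ∧ v = e.2.1) ∨ (e.2.1 ∈ c ∧ v = e.1) := by
  exact mem_satPass_aux w c v c

theorem satPass_prefix_aux (w : List (Int × Int × Int)) (c : PySem.Set Int) :
    ∀ acc : PySem.Set Int, ∃ ext, (w.foldl (fun nxt e =>
      let nxt1 := if PySem.Set.contains c e.1 then PySem.Set.add nxt e.2.1 else nxt
      if PySem.Set.contains c e.2.1 then PySem.Set.add nxt1 e.1 else nxt1) acc) = acc ++ ext := by
  induction w with
  | nil => exact fun acc => ⟨[], by simp⟩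
  | cons e w ih =>
    intro acc
    have add_pre : ∀ (s : PySem.Set Int) (z : Int), ∃ ext, PySem.Set.add s z = s ++ ext := by
      intro s z
      simp only [PySem.Set.add]
      split_ifs
      · exact ⟨[], by simp⟩
      · exact ⟨[z], rfl⟩
    have step : ∃ ext1, (let nxt1 := if PySem.Set.contains c e.1 then PySem.Set.add acc e.2.1 else acc
        if PySem.Set.contains c e.2.1 then PySem.Set.add nxt1 e.1 else nxt1) = acc ++ ext1 := by
      obtain ⟨u1, hu1⟩ : ∃ u, (if PySem.Set.contains c e.1 then PySem.Set.add acc e.2.1 else acc) = acc ++ u := by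
        split_ifs
        · exact add_pre acc e.2.1
        · exact ⟨[], by simp⟩
      show ∃ ext1, (if PySem.Set.contains c e.2.1 then PySem.Set.add (if PySem.Set.contains c e.1 then PySem.Set.add acc e.2.1 else acc) e.1 else (if PySem.Set.contains c e.1 then PySem.Set.add acc e.2.1 else acc)) = acc ++ ext1
      rw [hu1]
      obtain ⟨u2, hu2⟩ : ∃ u, (if PySem.Set.contains c e.2.1 then PySem.Set.add (acc ++ u1) e.1 else (acc ++ u1)) = (acc ++ u1) ++ u := by
        split_ifs
        · exact add_pre _ e.1
        · exact ⟨[], by simp⟩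
      exact ⟨u1 ++ u2, by rw [hu2, List.append_assoc]⟩
    obtain ⟨ext1, h1⟩ := step
    obtain ⟨ext2, h2⟩ := ih (acc ++ ext1)
    exact ⟨ext1 ++ ext2, by simp only [List.foldl_cons, h1, h2, List.append_assoc]⟩

theorem satPass_prefix (w : List (Int × Int × Int)) (c : PySem.Set Int) :
    ∃ ext, pvSatPass w c = c ++ ext := satPass_prefix_aux w c c

theorem nodup_add {c : PySem.Set Int} (h : c.Nodup) (z : Int) : (PySem.Set.add c z).Nodup := by
  have hadd : PySem.Set.add c z = if z ∈ c then c else c ++ [z] := by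
    simp [PySem.Set.add, PySem.Set.contains]
  rw [hadd]
  split_ifs with hm
  · exact h
  · simp only [List.nodup_append, List.nodup_cons, List.nodup_nil, and_true]
    refine ⟨h, ⟨by simp, ?_⟩⟩
    intro a ha b hb
    rw [List.mem_singleton] at hb
    subst hb
    exact fun hz => hm (hz ▸ ha)

theorem nodup_satPass_aux (w : List (Int × Int × Int)) (c : PySem.Set Int) :
    ∀ acc : PySem.Set Int, acc.Nodup → (w.foldl (fun nxt e =>
      let nxt1 := if PySem.Set.contains c e.1 then PySem.Set.add nxt e.2.1 else nxt
      if PySem.Set.contains c e.2.1 then PySem.Set.add nxt1 e.1 else nxt1) acc).Nodup := by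
  induction w with
  | nil => exact fun acc h => h
  | cons e w ih =>
    intro acc h
    rw [List.foldl_cons]
    apply ih
    show (if PySem.Set.contains c e.2.1 then PySem.Set.add (if PySem.Set.contains c e.1 then PySem.Set.add acc e.2.1 else acc) e.1 else (if PySem.Set.contains c e.1 then PySem.Set.add acc e.2.1 else acc)).Nodup
    split_ifs <;> first
      | exact nodup_add (nodup_add h _) _
      | exact nodup_add h _
      | exact h

theorem nodup_satPass (w : List (Int × Int × Int)) {c : PySem.Set Int} (h : c.Nodup) :
    (pvSatPass w c).Nodup := nodup_satPass_aux w c c h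

-- the iterated pass
def pvIterC (w : List (Int × Int × Int)) (x : Int) (k : Nat) : PySem.Set Int :=
  (pvSatPass w)^[k] (PySem.Set.ofList [x])

theorem foldl_range_const {α : Type} (g : α → α) : ∀ (n : Nat) (a : α),
    (List.range n).foldl (fun c _ => g c) a = g^[n] a := by
  intro n
  induction n with
  | zero => intro a; simp
  | succ n ih =>
    intro a
    rw [List.range_succ, List.foldl_append, ih, Function.iterate_succ_apply']
    simp

theorem subset_satPass (w : List (Int × Int × Int)) (c : PySem.Set Int) :
    ∀ v, v ∈ c → v ∈ pvSatPass w c := by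
  obtain ⟨ext, hext⟩ := satPass_prefix w c
  intro v hv
  rw [hext]
  exact List.mem_append_left _ hv

theorem pvIterC_subset {w : List (Int × Int × Int)} {x : Int} {k m : Nat} (h : k ≤ m) :
    ∀ v, v ∈ pvIterC w x k → v ∈ pvIterC w x m := by
  induction m with
  | zero => intro v hv; rwa [Nat.le_zero.1 h] at hv
  | succ m ih =>
    rcases Nat.lt_or_ge k (m+1) with hk | hk
    · intro v hv
      have : v ∈ pvIterC w x m := ih (Nat.lt_succ_iff.1 hk) v hv
      rw [pvIterC, Function.iterate_succ_apply']
      exact subset_satPass _ _ v this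
    · intro v hv
      have : k = m + 1 := Nat.le_antisymm h hk
      rwa [this] at hv

theorem pvIterC_elems {w : List (Int × Int × Int)} {x : Int} :
    ∀ (k : Nat) (v : Int), v ∈ pvIterC w x k → v ∈ x :: (w.map (fun e => e.1) ++ w.map (fun e => e.2.1)) := by
  intro k
  induction k with
  | zero =>
    intro v hv
    simp only [pvIterC, Function.iterate_zero_apply, PySem.Set.mem_ofList, List.mem_singleton] at hv
    simp [hv]
  | succ k ih =>
    intro v hv
    rw [pvIterC, Function.iterate_succ_apply', mem_satPass] at hv
    rcases hv with hv | ⟨e, he, ⟨h1, rfl⟩ | ⟨h1, rfl⟩⟩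
    · exact ih v hv
    · simp only [List.mem_cons, List.mem_append, List.mem_map]
      exact Or.inr (Or.inr ⟨e, he, rfl⟩)
    · simp only [List.mem_cons, List.mem_append, List.mem_map]
      exact Or.inr (Or.inl ⟨e, he, rfl⟩)

theorem pvIterC_nodup {w : List (Int × Int × Int)} {x : Int} : ∀ k, (pvIterC w x k).Nodup := by
  intro k
  induction k with
  | zero => simp [pvIterC, PySem.Set.nodup_ofList]
  | succ k ih =>
    rw [pvIterC, Function.iterate_succ_apply']
    exact nodup_satPass w ih

theorem satPass_growth {w : List (Int × Int × Int)} {c : PySem.Set Int}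
    (h : ¬ ∀ u, u ∈ pvSatPass w c ↔ u ∈ c) : c.length < (pvSatPass w c).length := by
  obtain ⟨ext, hext⟩ := satPass_prefix w c
  rcases List.eq_nil_or_concat ext with rfl | ⟨_, _, rfl⟩
  · exact absurd (fun u => by rw [hext]; simp) h
  · rw [hext]
    simp only [List.length_append, List.length_concat]
    omega

theorem satPass_pigeon (w : List (Int × Int × Int)) (x : Int) :
    ∀ K : Nat, (∃ m < K, ∀ u, u ∈ pvSatPass w (pvIterC w x m) ↔ u ∈ pvIterC w x m) ∨
      K + 1 ≤ (pvIterC w x K).length := by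
  intro K
  induction K with
  | zero => right; simp [pvIterC, PySem.Set.ofList]
  | succ K ih =>
    rcases ih with ⟨m, hm, hst⟩ | hlen
    · exact Or.inl ⟨m, Nat.lt_succ_of_lt hm, hst⟩
    · by_cases hst : ∀ u, u ∈ pvSatPass w (pvIterC w x K) ↔ u ∈ pvIterC w x K
      · exact Or.inl ⟨K, Nat.lt_succ_self K, hst⟩
      · right
        have hg := satPass_growth hst
        have hit : pvIterC w x (K+1) = pvSatPass w (pvIterC w x K) := by
          rw [pvIterC, pvIterC, Function.iterate_succ_apply']
        rw [hit]
        omega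

theorem pvIterC_length_le (w : List (Int × Int × Int)) (x : Int) (k : Nat) :
    (pvIterC w x k).length ≤ 2 * w.length + 1 := by
  classical
  have hnd := pvIterC_nodup (w := w) (x := x) k
  have hsub : (pvIterC w x k) ⊆ x :: (w.map (fun e => e.1) ++ w.map (fun e => e.2.1)) :=
    fun v hv => pvIterC_elems k v hv
  calc (pvIterC w x k).length = (pvIterC w x k).toFinset.card := (List.toFinset_card_of_nodup hnd).symm
    _ ≤ (x :: (w.map (fun e => e.1) ++ w.map (fun e => e.2.1))).toFinset.card := by
        apply Finset.card_le_card
        intro a ha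
        rw [List.mem_toFinset] at ha ⊢
        exact hsub ha
    _ ≤ (x :: (w.map (fun e => e.1) ++ w.map (fun e => e.2.1))).length := List.toFinset_card_le _
    _ = 2 * w.length + 1 := by simp; omega

theorem pvIterC_complete {w : List (Int × Int × Int)} {x v : Int}
    (h : pvReach w x v) : v ∈ pvIterC w x (2 * w.length + 1) := by
  rcases satPass_pigeon w x (2 * w.length + 1) with ⟨m, hm, hst⟩ | hlen
  · have hmem : v ∈ pvIterC w x m := by
      clear hm
      induction h with
      | refl =>
        have : x ∈ pvIterC w x 0 := by simp [pvIterC, PySem.Set.ofList]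
        exact pvIterC_subset (Nat.zero_le m) x this
      | @step a b hr hadj ih =>
        obtain ⟨e, he, hor⟩ := hadj
        have hb : b ∈ pvSatPass w (pvIterC w x m) := by
          rw [mem_satPass]
          rcases hor with ⟨rfl, rfl⟩ | ⟨rfl, rfl⟩
          · exact Or.inr ⟨e, he, Or.inl ⟨ih, rfl⟩⟩
          · exact Or.inr ⟨e, he, Or.inr ⟨ih, rfl⟩⟩
        exact (hst b).mp hb
    exact pvIterC_subset (Nat.le_of_lt hm) v hmem
  · exact absurd hlen (by have := pvIterC_length_le w x (2 * w.length + 1); omega)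
-- ---------- A side: slots, normalization, the adjacency-list graph as bucket lists ----------
def pvNorm (N : Nat) (v : Int) : Int := if v < 0 then v + N else v

def pvInRng (N : Nat) (v : Int) : Prop := -(N:Int) ≤ v ∧ v < N

def pvG0 (N : Nat) : List (List Int) := List.replicate N []

def pvAddEdges (G : List (List Int)) (es : List (Int × Int × Int)) : List (List Int) :=
  es.foldl (fun G e => pvAddEdge G e.1 e.2.1) G

def pvContrib (N : Nat) (es : List (Int × Int × Int)) (u : Int) : List Int :=
  es.flatMap (fun e => (if pvIdx N e.1 = pvIdx N u then [e.2.1] else []) ++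
    (if pvIdx N e.2.1 = pvIdx N u then [e.1] else []))

def pvAdjS (N : Nat) (es : List (Int × Int × Int)) (u v : Int) : Prop :=
  ∃ e ∈ es, (pvIdx N e.1 = pvIdx N u ∧ e.2.1 = v) ∨ (pvIdx N e.2.1 = pvIdx N u ∧ e.1 = v)

def pvOkE (N : Nat) (e : Int × Int × Int) : Prop := pvInRng N e.1 ∧ pvInRng N e.2.1

theorem pvIdx_cast (N k : Nat) : pvIdx N (k : Int) = k := by
  rw [pvIdx, if_neg (by omega)]
  omega

theorem pvIdx_lt {N : Nat} {v : Int} (h : pvInRng N v) : pvIdx N v < N := by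
  obtain ⟨h1, h2⟩ := h
  rw [pvIdx]
  split_ifs <;> omega

theorem pvNorm_nonneg {N : Nat} {v : Int} (h : pvInRng N v) : 0 ≤ pvNorm N v := by
  obtain ⟨h1, h2⟩ := h
  rw [pvNorm]
  split_ifs <;> omega

theorem pvNorm_lt {N : Nat} {v : Int} (h : pvInRng N v) : pvNorm N v < N := by
  obtain ⟨h1, h2⟩ := h
  rw [pvNorm]
  split_ifs <;> omega

theorem pvNorm_inRng {N : Nat} {v : Int} (h : pvInRng N v) : pvInRng N (pvNorm N v) :=
  ⟨by have := pvNorm_nonneg h; omega, pvNorm_lt h⟩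

theorem pvIdx_norm {N : Nat} {v : Int} (h : pvInRng N v) : pvIdx N (pvNorm N v) = pvIdx N v := by
  obtain ⟨h1, h2⟩ := h
  rw [pvIdx, pvIdx, pvNorm]
  split_ifs <;> omega

theorem lget_idx_eq {G : List (List Int)} {a u : Int}
    (h : pvIdx G.length a = pvIdx G.length u) : pvLGet G a = pvLGet G u := by
  rw [pvLGet, pvLGet, h]

theorem lget_set_self' {G : List (List Int)} {i : Nat} {u : Int} (hi : i < G.length)
    (hu : pvIdx G.length u = i) (l : List Int) : pvLGet (G.set i l) u = l := by
  rw [pvLGet, List.length_set, hu, List.getD_eq_getElem?_getD, List.getElem?_set_self',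
    List.getElem?_eq_getElem (by simpa using hi)]
  rfl

theorem lget_set_ne {G : List (List Int)} {i : Nat} {u : Int} (h : i ≠ pvIdx G.length u)
    (l : List Int) : pvLGet (G.set i l) u = pvLGet G u := by
  rw [pvLGet, List.length_set, List.getD_eq_getElem?_getD, List.getElem?_set_ne h,
    ← List.getD_eq_getElem?_getD, ← pvLGet]

theorem length_pvAddEdge (G : List (List Int)) (a b : Int) : (pvAddEdge G a b).length = G.length := by
  simp [pvAddEdge]

theorem length_pvAddEdges (es : List (Int × Int × Int)) : ∀ G : List (List Int),
    (pvAddEdges G es).length = G.length := by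
  induction es with
  | nil => intro G; rfl
  | cons e es ih => intro G; rw [pvAddEdges, List.foldl_cons, ← pvAddEdges, ih, length_pvAddEdge]

theorem lget_pvG0 (N : Nat) (u : Int) : pvLGet (pvG0 N) u = [] := by
  rw [pvLGet, List.getD_eq_getElem?_getD, pvG0, List.getElem?_replicate]
  split_ifs <;> rfl

theorem lget_pvAddEdge {G : List (List Int)} {a b : Int}
    (ha : pvInRng G.length a) (hb : pvInRng G.length b) (u : Int) :
    pvLGet (pvAddEdge G a b) u =
      pvLGet G u ++ ((if pvIdx G.length a = pvIdx G.length u then [b] else []) ++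
        (if pvIdx G.length b = pvIdx G.length u then [a] else [])) := by
  have hia : pvIdx G.length a < G.length := pvIdx_lt ha
  have hib : pvIdx G.length b < G.length := pvIdx_lt hb
  show pvLGet ((G.set (pvIdx G.length a) (pvLGet G a ++ [b])).set
      (pvIdx (G.set (pvIdx G.length a) (pvLGet G a ++ [b])).length b)
      (pvLGet (G.set (pvIdx G.length a) (pvLGet G a ++ [b])) b ++ [a])) u = _
  rw [show (G.set (pvIdx G.length a) (pvLGet G a ++ [b])).length = G.length by simp]
  by_cases hbu : pvIdx G.length b = pvIdx G.length u
  · rw [lget_set_self' (by simpa using hib) (by simp only [List.length_set]; exact hbu.symm)]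
    by_cases hab : pvIdx G.length a = pvIdx G.length b
    · rw [lget_set_self' (by simpa using hia) hab.symm]
      rw [if_pos (hab.trans hbu), if_pos hbu, lget_idx_eq (hab.trans hbu)]
      simp
    · rw [lget_set_ne hab]
      rw [if_neg (fun h => hab (h.trans hbu.symm)), if_pos hbu, lget_idx_eq hbu]
      simp
  · rw [lget_set_ne (by simp only [List.length_set]; exact hbu)]
    by_cases hau : pvIdx G.length a = pvIdx G.length u
    · rw [lget_set_self' (by simpa using hia) hau.symm]
      rw [if_pos hau, if_neg hbu, lget_idx_eq hau]
      simp
    · rw [lget_set_ne hau]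
      rw [if_neg hau, if_neg hbu]
      simp

theorem lget_pvAddEdges {es : List (Int × Int × Int)} : ∀ {G : List (List Int)},
    (∀ e ∈ es, pvOkE G.length e) → ∀ (u : Int),
    pvLGet (pvAddEdges G es) u = pvLGet G u ++ pvContrib G.length es u := by
  induction es with
  | nil => intro G _ u; simp [pvAddEdges, pvContrib]
  | cons e es ih =>
    intro G hes u
    obtain ⟨h1, h2⟩ := hes e List.mem_cons_self
    have hrest : ∀ f ∈ es, pvOkE (pvAddEdge G e.1 e.2.1).length f := by
      rw [length_pvAddEdge]; exact fun f hf => hes f (List.mem_cons_of_mem _ hf)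
    rw [pvAddEdges, List.foldl_cons, ← pvAddEdges, ih hrest u, length_pvAddEdge,
      lget_pvAddEdge h1 h2 u]
    simp [pvContrib, List.append_assoc]

theorem lget_pvAddEdges_G0 {N : Nat} {es : List (Int × Int × Int)}
    (hes : ∀ e ∈ es, pvOkE N e) (u : Int) :
    pvLGet (pvAddEdges (pvG0 N) es) u = pvContrib N es u := by
  have hlen : (pvG0 N).length = N := by simp [pvG0]
  rw [lget_pvAddEdges (by rw [hlen]; exact hes) u, lget_pvG0, hlen]
  rfl

theorem pvContrib_cons (N : Nat) (e : Int × Int × Int) (es : List (Int × Int × Int)) (u : Int) :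
    pvContrib N (e :: es) u =
      ((if pvIdx N e.1 = pvIdx N u then [e.2.1] else []) ++
        (if pvIdx N e.2.1 = pvIdx N u then [e.1] else [])) ++ pvContrib N es u := by
  simp [pvContrib]

theorem mem_pvContrib {N : Nat} {es : List (Int × Int × Int)} {u v : Int} :
    v ∈ pvContrib N es u ↔ pvAdjS N es u v := by
  simp only [pvContrib, pvAdjS, List.mem_flatMap, List.mem_append]
  constructor
  · rintro ⟨e, he, h | h⟩
    · split_ifs at h with hc
      · exact ⟨e, he, Or.inl ⟨hc, (List.mem_singleton.1 h).symm⟩⟩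
      · cases h
    · split_ifs at h with hc
      · exact ⟨e, he, Or.inr ⟨hc, (List.mem_singleton.1 h).symm⟩⟩
      · cases h
  · rintro ⟨e, he, ⟨h1, h2⟩ | ⟨h1, h2⟩⟩
    · exact ⟨e, he, Or.inl (by simp [h1, h2])⟩
    · exact ⟨e, he, Or.inr (by simp [h1, h2])⟩

theorem list_eq_of_lget {G H : List (List Int)} (hlen : G.length = H.length)
    (h : ∀ k : Nat, k < G.length → pvLGet G (k : Int) = pvLGet H (k : Int)) : G = H := by
  apply List.ext_getElem hlen
  intro k hk hk'
  have := h k hk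
  rw [pvLGet, pvLGet, pvIdx_cast, pvIdx_cast] at this
  simpa [List.getD_eq_getElem?_getD, List.getElem?_eq_getElem hk, List.getElem?_eq_getElem hk'] using this

theorem pvRemoveEdge_addEdges {N : Nat} {e : Int × Int × Int} {es : List (Int × Int × Int)}
    (he : pvOkE N e) (hes : ∀ f ∈ es, pvOkE N f) :
    pvRemoveEdge (pvAddEdges (pvG0 N) (e :: es)) e.1 e.2.1 = pvAddEdges (pvG0 N) es := by
  obtain ⟨ha, hb⟩ := he
  have hall : ∀ f ∈ e :: es, pvOkE N f := by
    intro f hf; rcases List.mem_cons.1 hf with rfl | hf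
    · exact ⟨ha, hb⟩
    · exact hes f hf
  set G := pvAddEdges (pvG0 N) (e :: es) with hG
  have hGlen : G.length = N := by rw [hG, length_pvAddEdges]; simp [pvG0]
  have hbucket : ∀ u : Int, pvLGet G u = pvContrib N (e :: es) u :=
    fun u => lget_pvAddEdges_G0 hall u
  have hbA : pvLGet G e.1 = e.2.1 :: ((if pvIdx N e.2.1 = pvIdx N e.1 then [e.1] else [])
      ++ pvContrib N es e.1) := by
    rw [hbucket e.1, pvContrib_cons]
    simp
  have hL1 : (PySem.List.remove? (pvLGet G e.1) e.2.1).getD (pvLGet G e.1)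
      = (if pvIdx N e.2.1 = pvIdx N e.1 then [e.1] else []) ++ pvContrib N es e.1 := by
    rw [hbA, PySem.List.remove?_cons_self]
    rfl
  set G1 := G.set (pvIdx G.length e.1) ((PySem.List.remove? (pvLGet G e.1) e.2.1).getD (pvLGet G e.1)) with hG1
  have hG1len : G1.length = N := by rw [hG1]; simpa using hGlen
  have hG1b : pvLGet G1 e.2.1 = e.1 :: pvContrib N es e.2.1 := by
    by_cases hab : pvIdx N e.2.1 = pvIdx N e.1
    · rw [hG1, lget_set_self' (by rw [hGlen]; exact pvIdx_lt ha) (by rw [hGlen, hab]), hL1]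
      rw [if_pos hab]
      rw [show pvContrib N es e.1 = pvContrib N es e.2.1 by
        unfold pvContrib; rw [show pvIdx N e.1 = pvIdx N e.2.1 from hab.symm]]
      rfl
    · rw [hG1, lget_set_ne (by rw [hGlen]; exact fun h => hab h.symm), hbucket e.2.1, pvContrib_cons]
      have hne : ¬ pvIdx N e.1 = pvIdx N e.2.1 := fun h => hab h.symm
      simp [hne]
  have hL2 : (PySem.List.remove? (pvLGet G1 e.2.1) e.1).getD (pvLGet G1 e.2.1)
      = pvContrib N es e.2.1 := by
    rw [hG1b, PySem.List.remove?_cons_self]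
    rfl
  show G1.set (pvIdx G1.length e.2.1) ((PySem.List.remove? (pvLGet G1 e.2.1) e.1).getD (pvLGet G1 e.2.1))
      = pvAddEdges (pvG0 N) es
  apply list_eq_of_lget
  · rw [List.length_set, hG1len, length_pvAddEdges]; simp [pvG0]
  · intro k hk
    rw [List.length_set, hG1len] at hk
    have hRHS : pvLGet (pvAddEdges (pvG0 N) es) (k : Int) = pvContrib N es (k : Int) :=
      lget_pvAddEdges_G0 hes _
    rw [hRHS]
    by_cases hkb : pvIdx N e.2.1 = k
    · rw [lget_set_self' (by rw [hG1len]; exact pvIdx_lt hb) (by rw [hG1len, pvIdx_cast]; exact hkb.symm), hL2]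
      rw [show pvContrib N es e.2.1 = pvContrib N es (k:Int) by
        unfold pvContrib; rw [show pvIdx N e.2.1 = pvIdx N (k:Int) by rw [pvIdx_cast]; exact hkb]]
    · rw [lget_set_ne (by rw [hG1len, pvIdx_cast]; exact fun h => hkb ((hG1len ▸ h : pvIdx N e.2.1 = k)))]
      by_cases hka : pvIdx N e.1 = k
      · rw [hG1, lget_set_self' (by rw [hGlen]; exact pvIdx_lt ha) (by rw [hGlen, pvIdx_cast]; exact hka.symm), hL1]
        have hne : ¬ pvIdx N e.2.1 = pvIdx N e.1 := by
          intro h; exact hkb (h.trans hka)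
        rw [if_neg hne]
        rw [show pvContrib N es e.1 = pvContrib N es (k:Int) by
          unfold pvContrib; rw [show pvIdx N e.1 = pvIdx N (k:Int) by rw [pvIdx_cast]; exact hka]]
        rfl
      · rw [hG1, lget_set_ne (by rw [hGlen, pvIdx_cast]; exact fun h => hka ((hGlen ▸ h : pvIdx N e.1 = k))), hbucket, pvContrib_cons]
        have h1 : ¬ pvIdx N e.1 = pvIdx N (k:Int) := by rw [pvIdx_cast]; exact hka
        have h2 : ¬ pvIdx N e.2.1 = pvIdx N (k:Int) := by rw [pvIdx_cast]; exact hkb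
        simp [h1, h2]

-- ---------- A side: BFS computes reachability ----------
def pvV (vis : List Bool) (v : Int) : Bool := vis.getD (pvIdx vis.length v) false

inductive pvRchG (G : List (List Int)) (x : Int) : Int → Prop
  | refl : pvRchG G x x
  | step {a b : Int} : pvRchG G x a → b ∈ pvLGet G a → pvRchG G x b

theorem pvIdx_eq_toNat {N : Nat} {v : Int} (h : 0 ≤ v) : pvIdx N v = v.toNat := by
  rw [pvIdx, if_neg (by omega)]

theorem pvV_set_self {l : List Bool} {v : Int} (h : pvInRng l.length v) :
    pvV (l.set (pvIdx l.length v) true) v = true := by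
  have hlt : pvIdx l.length v < l.length := pvIdx_lt h
  rw [pvV, List.length_set, List.getD_eq_getElem?_getD, List.getElem?_set_self',
    List.getElem?_eq_getElem (by simpa using hlt)]
  rfl

theorem pvV_set_other {l : List Bool} {i : Nat} {u : Int} (h : i ≠ pvIdx l.length u) (b : Bool) :
    pvV (l.set i b) u = pvV l u := by
  rw [pvV, List.length_set, List.getD_eq_getElem?_getD, List.getElem?_set_ne h,
    ← List.getD_eq_getElem?_getD, ← pvV]

theorem pvV_replicate (n : Nat) (v : Int) : pvV (List.replicate n false) v = false := by
  rw [pvV, List.getD_eq_getElem?_getD, List.getElem?_replicate]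
  split_ifs <;> rfl

theorem count_false_set_true : ∀ (l : List Bool) (i : Nat), i < l.length →
    l.getD i false = false → (l.set i true).count false + 1 = l.count false := by
  intro l
  induction l with
  | nil => intro i hi; simp at hi
  | cons a l ih =>
    intro i hi hf
    cases i with
    | zero =>
      simp only [List.getD_cons_zero] at hf
      subst hf
      simp [List.count_cons]
    | succ i =>
      simp only [List.getD_cons_succ] at hf
      have := ih i (by simpa using hi) hf
      simp only [List.set_cons_succ, List.count_cons]
      omega

theorem bfsInner_spec : ∀ (nbrs : List Int) (visited : List Bool) (Q : List Int),
    (∀ w ∈ nbrs, -(visited.length : Int) ≤ w ∧ w < (visited.length : Int)) →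
    ((pvBfsInner visited Q nbrs).1.length = visited.length) ∧
    (∀ v : Int, pvV visited v = true → pvV (pvBfsInner visited Q nbrs).1 v = true) ∧
    (∀ w ∈ nbrs, pvV (pvBfsInner visited Q nbrs).1 w = true) ∧
    (∃ new, (pvBfsInner visited Q nbrs).2 = Q ++ new ∧
        (∀ u ∈ new, u ∈ nbrs ∧ pvV (pvBfsInner visited Q nbrs).1 u = true) ∧
        (∀ v : Int, pvV (pvBfsInner visited Q nbrs).1 v = true →
          pvV visited v = false → ∃ u ∈ new, pvIdx visited.length u = pvIdx visited.length v)) ∧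
    ((pvBfsInner visited Q nbrs).2.length + (pvBfsInner visited Q nbrs).1.count false
        = Q.length + visited.count false) := by
  intro nbrs
  induction nbrs with
  | nil =>
    intro visited Q _
    refine ⟨rfl, fun v h => h, by simp, ⟨[], by rw [pvBfsInner]; simp, by simp, ?_⟩, by rw [pvBfsInner]⟩
    intro v h1 h2
    rw [pvBfsInner] at h1
    simp [h1] at h2
  | cons w rest ih =>
    intro visited Q hn
    obtain ⟨hw1, hw2⟩ := hn w List.mem_cons_self
    have hwi : pvIdx visited.length w < visited.length := pvIdx_lt ⟨hw1, hw2⟩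
    have hrest := fun v hv => hn v (List.mem_cons_of_mem _ hv)
    by_cases hv : pvV visited w = true
    · have hred : pvBfsInner visited Q (w :: rest) = pvBfsInner visited Q rest := by
        rw [pvBfsInner, if_pos (show visited.getD (pvIdx visited.length w) false = true from hv)]
      obtain ⟨ih1, ih2, ih3, ⟨new, hnew1, hnew2, hnew3⟩, ih5⟩ := ih visited Q hrest
      rw [hred]
      refine ⟨ih1, ih2, ?_, ⟨new, hnew1, ?_, ?_⟩, ih5⟩
      · intro v hvm
        rcases List.mem_cons.1 hvm with rfl | hvm
        · exact ih2 v hv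
        · exact ih3 v hvm
      · exact fun u hu => ⟨List.mem_cons_of_mem _ (hnew2 u hu).1, (hnew2 u hu).2⟩
      · exact hnew3
    · have hred : pvBfsInner visited Q (w :: rest) =
          pvBfsInner (visited.set (pvIdx visited.length w) true) (Q ++ [w]) rest := by
        rw [pvBfsInner, if_neg (show ¬ visited.getD (pvIdx visited.length w) false = true from hv)]
      have hlen' : (visited.set (pvIdx visited.length w) true).length = visited.length := by simp
      obtain ⟨ih1, ih2, ih3, ⟨new, hnew1, hnew2, hnew3⟩, ih5⟩ :=
        ih (visited.set (pvIdx visited.length w) true) (Q ++ [w]) (by rw [hlen']; exact hrest)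
      rw [hred]
      have hVw' : pvV (visited.set (pvIdx visited.length w) true) w = true := pvV_set_self ⟨hw1, hw2⟩
      have hmono : ∀ v : Int, pvV visited v = true →
          pvV (visited.set (pvIdx visited.length w) true) v = true := by
        intro v hvv
        by_cases hvw : pvIdx visited.length w = pvIdx visited.length v
        · rw [pvV, hlen', ← hvw, List.getD_eq_getElem?_getD, List.getElem?_set_self',
            List.getElem?_eq_getElem (by simpa using hwi)]
          rfl
        · rwa [pvV_set_other hvw]
      have hcnt : (visited.set (pvIdx visited.length w) true).count false + 1 = visited.count false :=
        count_false_set_true visited _ hwi (by simpa [pvV] using hv)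
      refine ⟨by rw [ih1, hlen'], ?_, ?_, ⟨w :: new, ?_, ?_, ?_⟩, ?_⟩
      · exact fun v hvv => ih2 v (hmono v hvv)
      · intro v hvm
        rcases List.mem_cons.1 hvm with rfl | hvm
        · exact ih2 v hVw'
        · exact ih3 v hvm
      · rw [hnew1, List.append_assoc]; rfl
      · intro u hu
        rcases List.mem_cons.1 hu with rfl | hu
        · exact ⟨List.mem_cons_self, ih2 u hVw'⟩
        · exact ⟨List.mem_cons_of_mem _ (hnew2 u hu).1, (hnew2 u hu).2⟩
      · intro v hvt hvf
        by_cases hvw : pvIdx visited.length w = pvIdx visited.length v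
        · exact ⟨w, List.mem_cons_self, hvw⟩
        · have : pvV (visited.set (pvIdx visited.length w) true) v = false := by
            rw [pvV_set_other hvw]
            exact hvf
          obtain ⟨u, hu, hui⟩ := hnew3 v hvt this
          exact ⟨u, List.mem_cons_of_mem _ hu, by rw [← hlen']; exact hui⟩
      · rw [ih5]
        simp only [List.length_append, List.length_cons, List.length_nil]
        omega

theorem pvBfsLoop_zero (G : List (List Int)) (y : Int) (vis : List Bool) (Q : List Int) :
    pvBfsLoop G y 0 vis Q = pvV vis y := rfl

theorem pvBfsLoop_succ_nil (G : List (List Int)) (y : Int) (fuel : Nat) (vis : List Bool) :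
    pvBfsLoop G y (fuel+1) vis [] = pvV vis y := by
  rw [pvBfsLoop.eq_def]; simp; rfl

theorem pvBfsLoop_succ_cons (G : List (List Int)) (y : Int) (fuel : Nat) (vis : List Bool)
    (u : Int) (Qt : List Int) :
    pvBfsLoop G y (fuel+1) vis (u :: Qt) =
      if pvV vis y then pvV vis y
      else pvBfsLoop G y fuel (pvBfsInner vis Qt (pvLGet G u)).1 (pvBfsInner vis Qt (pvLGet G u)).2 := by
  rw [pvBfsLoop.eq_def]
  by_cases h : pvV vis y = true <;>
    simp only [pvV, List.getD_eq_getElem?_getD] at h <;>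
    simp [h, pvV, List.getD_eq_getElem?_getD]

theorem bfsLoop_iff (G : List (List Int)) (x y : Int)
    (hG : ∀ (u : Int), 0 ≤ u → ∀ v ∈ pvLGet G u, 0 ≤ v ∧ v < (G.length : Int))
    (hx0 : 0 ≤ x) (hy0 : 0 ≤ y) (hy : y < (G.length : Int)) :
    ∀ (fuel : Nat) (visited : List Bool) (Q : List Int),
    visited.length = G.length →
    Q.length + visited.count false ≤ fuel →
    pvV visited x = true →
    (∀ u ∈ Q, 0 ≤ u ∧ u < (G.length : Int) ∧ pvV visited u = true) →
    (∀ v : Int, 0 ≤ v → pvV visited v = true → pvRchG G x v) →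
    (∀ v : Int, 0 ≤ v → pvV visited v = true → v ∈ Q ∨ ∀ w ∈ pvLGet G v, pvV visited w = true) →
    (pvBfsLoop G y fuel visited Q = true ↔ pvRchG G x y) := by
  intro fuel
  induction fuel with
  | zero =>
    intro visited Q hlen hm hVx hQ hR hF
    have hcnt : visited.count false = 0 := by omega
    have hall : ∀ v : Int, 0 ≤ v → v < (G.length : Int) → pvV visited v = true := by
      intro v hv0 hv
      have hlt : pvIdx visited.length v < visited.length := by
        rw [pvIdx_eq_toNat hv0]; omega
      rw [pvV, List.getD_eq_getElem?_getD, List.getElem?_eq_getElem hlt]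
      simp only [Option.getD_some]
      rcases Bool.eq_false_or_eq_true visited[pvIdx visited.length v] with ht | hf
      · exact ht
      · exfalso
        have : 0 < visited.count false := List.count_pos_iff.2 (hf ▸ List.getElem_mem hlt)
        omega
    have hVy : pvV visited y = true := hall y hy0 hy
    rw [pvBfsLoop_zero, hVy]
    simp only [true_iff]
    exact hR y hy0 hVy
  | succ fuel ih =>
    intro visited Q hlen hm hVx hQ hR hF
    cases Q with
    | nil =>
      rw [pvBfsLoop_succ_nil]
      have hclosed : ∀ v : Int, pvRchG G x v → 0 ≤ v ∧ pvV visited v = true := by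
        intro v hrch
        induction hrch with
        | refl => exact ⟨hx0, hVx⟩
        | @step a b hr hb ihh =>
          obtain ⟨ha0, hVa⟩ := ihh
          rcases hF a ha0 hVa with hmem | hcl
          · cases hmem
          · exact ⟨(hG a ha0 b hb).1, hcl b hb⟩
      constructor
      · intro h; exact hR y hy0 h
      · intro h; exact (hclosed y h).2
    | cons u Qt =>
      rw [pvBfsLoop_succ_cons]
      by_cases hVy : pvV visited y = true
      · rw [hVy]
        simp only [if_true, true_iff]
        exact hR y hy0 hVy
      · have hc : pvV visited y = false := (Bool.eq_false_iff).2 hVy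
        rw [hc]
        simp only [Bool.false_eq_true, if_false]
        obtain ⟨hu0, hult, hVu⟩ := hQ u List.mem_cons_self
        have hnb : ∀ w ∈ pvLGet G u, -(visited.length:Int) ≤ w ∧ w < (visited.length : Int) := by
          rw [hlen]
          intro w hw
          have := hG u hu0 w hw
          exact ⟨by omega, this.2⟩
        obtain ⟨s1, s2, s3, ⟨new, hnew1, hnew2, hnew3⟩, s5⟩ := bfsInner_spec (pvLGet G u) visited Qt hnb
        apply ih
        · rw [s1, hlen]
        · rw [s5]
          simp only [List.length_cons] at hm
          omega
        · exact s2 x hVx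
        · rw [hnew1]
          intro v hv
          rcases List.mem_append.1 hv with hv | hv
          · obtain ⟨h1, h2, h3⟩ := hQ v (List.mem_cons_of_mem _ hv)
            exact ⟨h1, h2, s2 v h3⟩
          · obtain ⟨hvn, hvt⟩ := hnew2 v hv
            exact ⟨(hG u hu0 v hvn).1, (hG u hu0 v hvn).2, hvt⟩
        · intro v hv0 hvt
          by_cases hold : pvV visited v = true
          · exact hR v hv0 hold
          · obtain ⟨u', hu'new, hu'i⟩ := hnew3 v hvt ((Bool.eq_false_iff).2 hold)
            have hvn : u' ∈ pvLGet G u := (hnew2 u' hu'new).1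
            have hu'0 : 0 ≤ u' := (hG u hu0 u' hvn).1
            have : u' = v := by
              rw [pvIdx_eq_toNat hu'0, pvIdx_eq_toNat hv0] at hu'i
              omega
            rw [← this]
            exact pvRchG.step (hR u hu0 hVu) hvn
        · intro v hv0 hvt
          by_cases hold : pvV visited v = true
          · rcases hF v hv0 hold with hmem | hcl
            · rcases List.mem_cons.1 hmem with rfl | hmem
              · right
                exact fun w hw => s3 w hw
              · left
                rw [hnew1]
                exact List.mem_append_left _ hmem
            · right
              exact fun w hw => s2 w (hcl w hw)
          · left
            obtain ⟨u', hu'new, hu'i⟩ := hnew3 v hvt ((Bool.eq_false_iff).2 hold)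
            have hvn : u' ∈ pvLGet G u := (hnew2 u' hu'new).1
            have hu'0 : 0 ≤ u' := (hG u hu0 u' hvn).1
            have : u' = v := by
              rw [pvIdx_eq_toNat hu'0, pvIdx_eq_toNat hv0] at hu'i
              omega
            rw [hnew1, ← this]
            exact List.mem_append_right _ hu'new

theorem pvBFS_iff {G : List (List Int)} {x y : Int}
    (hG : ∀ (u : Int), 0 ≤ u → ∀ v ∈ pvLGet G u, 0 ≤ v ∧ v < (G.length : Int))
    (hx0 : 0 ≤ x) (hx : x < (G.length : Int)) (hy0 : 0 ≤ y) (hy : y < (G.length : Int)) :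
    (pvBFS G x y = true ↔ pvRchG G x y) := by
  unfold pvBFS
  have hlenr : (List.replicate G.length false).length = G.length := by simp
  have hVx : pvV ((List.replicate G.length false).set (pvIdx G.length x) true) x = true := by
    rw [show pvIdx G.length x = pvIdx (List.replicate G.length false).length x by rw [hlenr]]
    exact pvV_set_self ⟨by rw [hlenr]; omega, by rw [hlenr]; exact hx⟩
  have honly : ∀ v : Int, 0 ≤ v →
      pvV ((List.replicate G.length false).set (pvIdx G.length x) true) v = true → v = x := by
    intro v hv0 hvt
    by_cases hvx : pvIdx G.length x = pvIdx (List.replicate G.length false).length v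
    · rw [hlenr, pvIdx_eq_toNat hv0, pvIdx_eq_toNat hx0] at hvx
      omega
    · rw [pvV_set_other hvx, pvV_replicate] at hvt
      cases hvt
  apply bfsLoop_iff G x y hG hx0 hy0 hy
  · simp
  · have : ((List.replicate G.length false).set (pvIdx G.length x) true).count false ≤ G.length := by
      calc ((List.replicate G.length false).set (pvIdx G.length x) true).count false
          ≤ ((List.replicate G.length false).set (pvIdx G.length x) true).length := List.count_le_length
        _ = G.length := by simp
    simp only [List.length_cons, List.length_nil]
    omega
  · exact hVx
  · intro u hu
    rcases List.mem_cons.1 hu with rfl | hu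
    · exact ⟨hx0, hx, hVx⟩
    · cases hu
  · intro v hv0 hvt
    rw [honly v hv0 hvt]
    exact pvRchG.refl
  · intro v hv0 hvt
    left
    rw [honly v hv0 hvt]
    exact List.mem_cons_self

theorem pvBFS_self {G : List (List Int)} {x y : Int}
    (hx : pvInRng G.length x) (hxy : pvIdx G.length x = pvIdx G.length y) :
    pvBFS G x y = true := by
  unfold pvBFS
  have hVy : pvV ((List.replicate G.length false).set (pvIdx G.length x) true) y = true := by
    have hxi : pvIdx G.length x < G.length := pvIdx_lt hx
    rw [pvV, List.length_set, List.length_replicate, ← hxy, List.getD_eq_getElem?_getD,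
      List.getElem?_set_self', List.getElem?_eq_getElem (by simpa using hxi)]
    rfl
  rw [pvBfsLoop_succ_cons, hVy]
  simp

theorem pvAdjS_iff_adjE {N : Nat} {es : List (Int × Int × Int)} {u v : Int}
    (hes : ∀ e ∈ es, 0 ≤ e.1 ∧ e.1 < (N:Int) ∧ 0 ≤ e.2.1 ∧ e.2.1 < (N:Int))
    (hu0 : 0 ≤ u) (huN : u < (N:Int)) :
    pvAdjS N es u v ↔ pvAdjE es u v := by
  constructor
  · rintro ⟨e, he, ⟨h1, h2⟩ | ⟨h1, h2⟩⟩
    · obtain ⟨e1, e2, e3, e4⟩ := hes e he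
      rw [pvIdx_eq_toNat e1, pvIdx_eq_toNat hu0] at h1
      exact ⟨e, he, Or.inl ⟨by omega, h2⟩⟩
    · obtain ⟨e1, e2, e3, e4⟩ := hes e he
      rw [pvIdx_eq_toNat e3, pvIdx_eq_toNat hu0] at h1
      exact ⟨e, he, Or.inr ⟨h2, by omega⟩⟩
  · rintro ⟨e, he, ⟨h1, h2⟩ | ⟨h1, h2⟩⟩
    · exact ⟨e, he, Or.inl ⟨by rw [h1], h2⟩⟩
    · exact ⟨e, he, Or.inr ⟨by rw [h2], h1⟩⟩

theorem rchG_iff_reach {N : Nat} {es : List (Int × Int × Int)}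
    (hes : ∀ e ∈ es, 0 ≤ e.1 ∧ e.1 < (N:Int) ∧ 0 ≤ e.2.1 ∧ e.2.1 < (N:Int))
    {x : Int} (hx : 0 ≤ x) (hxN : x < (N:Int)) (v : Int) :
    pvRchG (pvAddEdges (pvG0 N) es) x v ↔ pvReach es x v := by
  have hesOk : ∀ e ∈ es, pvOkE N e := by
    intro e he
    obtain ⟨e1, e2, e3, e4⟩ := hes e he
    exact ⟨⟨by omega, e2⟩, ⟨by omega, e4⟩⟩
  constructor
  · intro h
    suffices hh : (0 ≤ v ∧ v < (N:Int)) ∧ pvReach es x v from hh.2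
    induction h with
    | refl => exact ⟨⟨hx, hxN⟩, pvReach.refl⟩
    | @step a b hr hb ihh =>
      obtain ⟨⟨ha0, haN⟩, hra⟩ := ihh
      rw [lget_pvAddEdges_G0 hesOk, mem_pvContrib] at hb
      rw [pvAdjS_iff_adjE hes ha0 haN] at hb
      have hb0 : 0 ≤ b ∧ b < (N:Int) := by
        obtain ⟨e, he, hor⟩ := hb
        obtain ⟨e1, e2, e3, e4⟩ := hes e he
        rcases hor with ⟨h1, h2⟩ | ⟨h1, h2⟩
        · exact ⟨h2 ▸ e3, h2 ▸ e4⟩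
        · exact ⟨h1 ▸ e1, h1 ▸ e2⟩
      exact ⟨hb0, pvReach.step hra hb⟩
  · intro h
    suffices hh : (0 ≤ v ∧ v < (N:Int)) ∧ pvRchG (pvAddEdges (pvG0 N) es) x v from hh.2
    induction h with
    | refl => exact ⟨⟨hx, hxN⟩, pvRchG.refl⟩
    | @step a b hr hadj ihh =>
      obtain ⟨⟨ha0, haN⟩, hra⟩ := ihh
      have hb0 : 0 ≤ b ∧ b < (N:Int) := by
        obtain ⟨e, he, hor⟩ := hadj
        obtain ⟨e1, e2, e3, e4⟩ := hes e he
        rcases hor with ⟨h1, h2⟩ | ⟨h1, h2⟩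
        · exact ⟨h2 ▸ e3, h2 ▸ e4⟩
        · exact ⟨h1 ▸ e1, h1 ▸ e2⟩
      have hb : b ∈ pvLGet (pvAddEdges (pvG0 N) es) a := by
        rw [lget_pvAddEdges_G0 hesOk, mem_pvContrib, pvAdjS_iff_adjE hes ha0 haN]
        exact hadj
      exact ⟨hb0, pvRchG.step hra hb⟩

-- ---------- A side: slices, windows, the filling loop ----------
def pvSlice (S : List (Int × Int × Int)) (a b : Nat) : List (Int × Int × Int) :=
  (S.drop a).take (b - a)

theorem pvSlice_self (S : List (Int × Int × Int)) (a : Nat) : pvSlice S a a = [] := by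
  simp [pvSlice]

theorem pvSlice_cons {S : List (Int × Int × Int)} {a b : Nat} (h1 : a < b) (h2 : a < S.length) :
    pvSlice S a b = S.getD a (0,0,0) :: pvSlice S (a+1) b := by
  rw [pvSlice, pvSlice, List.drop_eq_getElem_cons h2]
  rw [show b - a = (b - (a+1)) + 1 by omega]
  rw [List.take_succ_cons]
  rw [List.getD_eq_getElem?_getD, List.getElem?_eq_getElem h2]
  rfl

theorem pvSlice_subset {S : List (Int × Int × Int)} {a b : Nat} :
    ∀ e ∈ pvSlice S a b, e ∈ S := by
  intro e he
  exact List.mem_of_mem_drop (List.mem_of_mem_take he)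

theorem pvAddEdges_cons (G : List (List Int)) (e : Int × Int × Int) (es : List (Int × Int × Int)) :
    pvAddEdges G (e :: es) = pvAddEdges (pvAddEdge G e.1 e.2.1) es := rfl

theorem takeWhile_eq_take {α : Type} (p : α → Bool) (d : α) : ∀ (l : List α) (m : Nat),
    m ≤ l.length →
    (∀ k, k < m → p (l.getD k d) = true) →
    (m = l.length ∨ p (l.getD m d) = false) →
    l.takeWhile p = l.take m := by
  intro l
  induction l with
  | nil => intro m hm _ _; simp at hm; simp [hm]
  | cons a l ih =>
    intro m hm hall hend
    cases m with
    | zero =>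
      rcases hend with hend | hend
      · simp at hend
      · simp only [List.getD_cons_zero] at hend
        simp [List.takeWhile_cons, hend]
    | succ m =>
      have hpa : p a = true := by simpa using hall 0 (Nat.succ_pos m)
      rw [List.takeWhile_cons, hpa]
      simp only [if_true, List.take_succ_cons]
      congr 1
      apply ih m (by simpa using hm)
      · intro k hk
        simpa using hall (k+1) (by omega)
      · rcases hend with hend | hend
        · left; simpa using hend
        · right; simpa using hend

theorem filter_eq_takeWhile (lo twot : Int) : ∀ (l : List (Int × Int × Int)),
    l.Pairwise (fun a b => a.2.2 ≤ b.2.2) →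
    l.filter (fun e => decide (e.2.2 - lo ≤ twot)) = l.takeWhile (fun e => decide (e.2.2 - lo ≤ twot)) := by
  intro l
  induction l with
  | nil => simp
  | cons a l ih =>
    intro hp
    rw [List.pairwise_cons] at hp
    by_cases hpa : a.2.2 - lo ≤ twot
    · rw [List.filter_cons, List.takeWhile_cons]
      simp only [hpa, decide_true, if_true]
      rw [ih hp.2]
    · rw [List.filter_cons, List.takeWhile_cons]
      simp only [hpa, decide_false, Bool.false_eq_true, if_false]
      rw [List.filter_eq_nil_iff.2]
      intro e he
      simp only [decide_eq_true_eq]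
      have := hp.1 e he
      omega

theorem pvAddLoop_zero (S : List (Int × Int × Int)) (E : Nat) (twot ti : Int)
    (G : List (List Int)) (j : Nat) (fl : Bool) :
    pvAddLoop S E twot ti 0 G j fl = (G, j, fl) := rfl

theorem pvAddLoop_succ (S : List (Int × Int × Int)) (E : Nat) (twot ti : Int) (fuel : Nat)
    (G : List (List Int)) (j : Nat) (fl : Bool) :
    pvAddLoop S E twot ti (fuel+1) G j fl =
      if j < E ∧ (S.getD j (0,0,0)).2.2 - ti ≤ twot then
        pvAddLoop S E twot ti fuel
          (pvAddEdge G (S.getD j (0,0,0)).1 (S.getD j (0,0,0)).2.1) (j+1) true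
      else (G, j, fl) := rfl

theorem pvAddLoop_spec {S : List (Int × Int × Int)} {E : Nat} {twot ti : Int}
    (hE : E = S.length) : ∀ (fuel : Nat) (G : List (List Int)) (j : Nat) (fl : Bool),
    j ≤ E → E - j ≤ fuel →
    ∃ j', pvAddLoop S E twot ti fuel G j fl =
        (pvAddEdges G (pvSlice S j j'), j', fl || decide (j < j')) ∧
      j ≤ j' ∧ j' ≤ E ∧
      (∀ k, j ≤ k → k < j' → ((S.getD k (0,0,0)).2.2 - ti ≤ twot)) ∧
      (j' = E ∨ ¬ ((S.getD j' (0,0,0)).2.2 - ti ≤ twot)) := by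
  intro fuel
  induction fuel with
  | zero =>
    intro G j fl hj hfuel
    have hjE : j = E := by omega
    refine ⟨j, ?_, le_refl j, hjE ▸ le_refl j, by omega, Or.inl hjE⟩
    rw [pvAddLoop_zero, pvSlice_self]
    simp [pvAddEdges]
  | succ fuel ih =>
    intro G j fl hj hfuel
    rw [pvAddLoop_succ]
    by_cases hc : j < E ∧ (S.getD j (0,0,0)).2.2 - ti ≤ twot
    · rw [if_pos hc]
      obtain ⟨j', heq, hj1, hj2, hall, hend⟩ :=
        ih (pvAddEdge G (S.getD j (0,0,0)).1 (S.getD j (0,0,0)).2.1) (j+1) true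
          (by omega) (by omega)
      refine ⟨j', ?_, by omega, hj2, ?_, hend⟩
      · rw [heq]
        have hslice : pvSlice S j j' = S.getD j (0,0,0) :: pvSlice S (j+1) j' := by
          apply pvSlice_cons (by omega) (by omega)
        rw [hslice, pvAddEdges_cons]
        have hdec : decide (j < j') = true := by simp; omega
        have hdec2 : (true || decide (j + 1 < j')) = true := by simp
        rw [hdec, hdec2, Bool.or_true]
      · intro k hk1 hk2
        rcases Nat.eq_or_lt_of_le hk1 with rfl | hk1
        · exact hc.2
        · exact hall k (by omega) hk2
    · rw [if_neg hc]
      refine ⟨j, ?_, le_refl j, hj, by omega, ?_⟩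
      · rw [pvSlice_self]
        simp [pvAddEdges]
      · rcases Nat.eq_or_lt_of_le hj with rfl | hj'
        · exact Or.inl rfl
        · right
          intro hle
          exact hc ⟨hj', hle⟩

-- ---------- A side: normalization of the graph, BFS simulation ----------
def pvNormE (N : Nat) (e : Int × Int × Int) : Int × Int × Int :=
  (pvNorm N e.1, pvNorm N e.2.1, e.2.2)

theorem pvOkE_normE {N : Nat} {e : Int × Int × Int} (h : pvOkE N e) : pvOkE N (pvNormE N e) :=
  ⟨pvNorm_inRng h.1, pvNorm_inRng h.2⟩

theorem pvContrib_map {N : Nat} {es : List (Int × Int × Int)}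
    (hes : ∀ e ∈ es, pvOkE N e) (u : Int) :
    pvContrib N (es.map (pvNormE N)) u = (pvContrib N es u).map (pvNorm N) := by
  induction es with
  | nil => rfl
  | cons e es ih =>
    obtain ⟨h1, h2⟩ := hes e List.mem_cons_self
    have ihr := ih (fun f hf => hes f (List.mem_cons_of_mem _ hf))
    rw [List.map_cons, pvContrib_cons, pvContrib_cons, ihr]
    rw [show pvIdx N (pvNormE N e).1 = pvIdx N e.1 from pvIdx_norm h1]
    rw [show pvIdx N (pvNormE N e).2.1 = pvIdx N e.2.1 from pvIdx_norm h2]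
    simp only [List.map_append]
    congr 1
    split_ifs <;> rfl

theorem lget_norm_graph {N : Nat} {es : List (Int × Int × Int)}
    (hes : ∀ e ∈ es, pvOkE N e) (u : Int) :
    pvLGet (pvAddEdges (pvG0 N) (es.map (pvNormE N))) u
      = (pvLGet (pvAddEdges (pvG0 N) es) u).map (pvNorm N) := by
  rw [lget_pvAddEdges_G0 (fun f hf => by
      obtain ⟨e, he, rfl⟩ := List.mem_map.1 hf
      exact pvOkE_normE (hes e he)), lget_pvAddEdges_G0 hes, pvContrib_map hes]

theorem bfsInner_map {N : Nat} : ∀ (nbrs : List Int) (vis : List Bool) (Q : List Int),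
    vis.length = N → (∀ w ∈ nbrs, pvInRng N w) →
    (pvBfsInner vis (Q.map (pvNorm N)) (nbrs.map (pvNorm N))).1 = (pvBfsInner vis Q nbrs).1 ∧
    (pvBfsInner vis (Q.map (pvNorm N)) (nbrs.map (pvNorm N))).2
      = ((pvBfsInner vis Q nbrs).2).map (pvNorm N) := by
  intro nbrs
  induction nbrs with
  | nil => intro vis Q _ _; rw [pvBfsInner]; exact ⟨rfl, rfl⟩
  | cons w rest ih =>
    intro vis Q hlen hr
    have hw : pvInRng N w := hr w List.mem_cons_self
    have hrest := fun v hv => hr v (List.mem_cons_of_mem _ hv)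
    have hidx : pvIdx vis.length (pvNorm N w) = pvIdx vis.length w := by
      rw [hlen]; exact pvIdx_norm hw
    rw [List.map_cons, pvBfsInner, pvBfsInner, hidx]
    by_cases hv : vis.getD (pvIdx vis.length w) false = true
    · rw [if_pos hv, if_pos hv]
      exact ih vis Q hlen hrest
    · rw [if_neg hv, if_neg hv]
      have hlen' : (vis.set (pvIdx vis.length w) true).length = N := by simpa using hlen
      obtain ⟨ha, hb⟩ := ih (vis.set (pvIdx vis.length w) true) (Q ++ [w]) hlen' hrest
      rw [show Q.map (pvNorm N) ++ [pvNorm N w] = (Q ++ [w]).map (pvNorm N) by simp]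
      exact ⟨ha, hb⟩

theorem bfsLoop_map {N : Nat} {G Gn : List (List Int)} {y : Int}
    (hGlen : G.length = N) (hGnlen : Gn.length = N)
    (hcorr : ∀ u : Int, pvLGet Gn u = (pvLGet G u).map (pvNorm N))
    (hGr : ∀ (u : Int), ∀ v ∈ pvLGet G u, pvInRng N v)
    (hy : pvInRng N y) :
    ∀ (fuel : Nat) (vis : List Bool) (Q : List Int),
    vis.length = N → (∀ u ∈ Q, pvInRng N u) →
    pvBfsLoop Gn (pvNorm N y) fuel vis (Q.map (pvNorm N)) = pvBfsLoop G y fuel vis Q := by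
  intro fuel
  induction fuel with
  | zero =>
    intro vis Q hlen _
    rw [pvBfsLoop_zero, pvBfsLoop_zero, pvV, pvV, hlen, pvIdx_norm hy]
  | succ fuel ih =>
    intro vis Q hlen hQ
    have hVy : pvV vis (pvNorm N y) = pvV vis y := by
      rw [pvV, pvV, hlen, pvIdx_norm hy]
    cases Q with
    | nil =>
      rw [List.map_nil, pvBfsLoop_succ_nil, pvBfsLoop_succ_nil, hVy]
    | cons u Qt =>
      have hu : pvInRng N u := hQ u List.mem_cons_self
      have hQt := fun v hv => hQ v (List.mem_cons_of_mem _ hv)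
      rw [List.map_cons, pvBfsLoop_succ_cons, pvBfsLoop_succ_cons, hVy]
      by_cases hc : pvV vis y = true
      · simp [hc]
      · rw [(Bool.eq_false_iff).2 hc]
        simp only [Bool.false_eq_true, if_false]
        have hbkt : pvLGet Gn (pvNorm N u) = (pvLGet G u).map (pvNorm N) := by
          rw [show pvLGet Gn (pvNorm N u) = pvLGet Gn u from
            lget_idx_eq (by rw [hGnlen]; exact pvIdx_norm hu), hcorr]
        rw [hbkt]
        have hnb : ∀ w ∈ pvLGet G u, pvInRng N w := hGr u
        obtain ⟨ha, hb⟩ := bfsInner_map (N := N) (pvLGet G u) vis Qt hlen hnb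
        rw [ha, hb]
        apply ih
        · have := (bfsInner_spec (pvLGet G u) vis Qt (by
            rw [hlen]
            exact fun w hw => ⟨(hnb w hw).1, (hnb w hw).2⟩)).1
          rw [this, hlen]
        · obtain ⟨new, hnew1, hnew2, _⟩ := (bfsInner_spec (pvLGet G u) vis Qt (by
            rw [hlen]
            exact fun w hw => ⟨(hnb w hw).1, (hnb w hw).2⟩)).2.2.2.1
          rw [hnew1]
          intro v hv
          rcases List.mem_append.1 hv with hv | hv
          · exact hQt v hv
          · exact hnb v (hnew2 v hv).1

theorem pvBFS_map {N : Nat} {G Gn : List (List Int)} {x y : Int}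
    (hGlen : G.length = N) (hGnlen : Gn.length = N)
    (hcorr : ∀ u : Int, pvLGet Gn u = (pvLGet G u).map (pvNorm N))
    (hGr : ∀ (u : Int), ∀ v ∈ pvLGet G u, pvInRng N v)
    (hx : pvInRng N x) (hy : pvInRng N y) :
    pvBFS Gn (pvNorm N x) (pvNorm N y) = pvBFS G x y := by
  unfold pvBFS
  rw [hGlen, hGnlen]
  rw [show pvIdx N (pvNorm N x) = pvIdx N x from pvIdx_norm hx]
  rw [show [pvNorm N x] = ([x] : List Int).map (pvNorm N) from rfl]
  apply bfsLoop_map hGlen hGnlen hcorr hGr hy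
  · simp
  · intro u hu
    rcases List.mem_cons.1 hu with rfl | hu
    · exact hx
    · cases hu

-- ---------- A side: the main sliding-window loop ----------
def pvWin (S : List (Int × Int × Int)) (twot : Int) (i : Nat) : List (Int × Int × Int) :=
  (S.drop i).filter (fun e => decide (e.2.2 - (S.getD i (0,0,0)).2.2 ≤ twot))

def pvInv (S : List (Int × Int × Int)) (E : Nat) (twot : Int) (N : Nat)
    (G : List (List Int)) (i j : Nat) : Prop :=
  i ≤ j ∧ j ≤ E ∧
  (∀ k, i ≤ k → k < j → (S.getD k (0,0,0)).2.2 - (S.getD i (0,0,0)).2.2 ≤ twot) ∧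
  (j = E ∨ ¬ ((S.getD j (0,0,0)).2.2 - (S.getD i (0,0,0)).2.2 ≤ twot)) ∧
  G = pvAddEdges (pvG0 N) (pvSlice S i j)

theorem getD_drop (S : List (Int × Int × Int)) (i k : Nat) :
    (S.drop i).getD k (0,0,0) = S.getD (i+k) (0,0,0) := by
  rw [List.getD_eq_getElem?_getD, List.getD_eq_getElem?_getD, List.getElem?_drop]

theorem getD_mono {S : List (Int × Int × Int)} (hs : S.Pairwise (fun a b => a.2.2 ≤ b.2.2))
    {p q : Nat} (hpq : p ≤ q) (hq : q < S.length) :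
    (S.getD p (0,0,0)).2.2 ≤ (S.getD q (0,0,0)).2.2 := by
  rcases Nat.eq_or_lt_of_le hpq with rfl | hlt
  · exact le_refl _
  · have hp : p < S.length := by omega
    rw [List.getD_eq_getElem?_getD, List.getD_eq_getElem?_getD,
      List.getElem?_eq_getElem hp, List.getElem?_eq_getElem hq]
    exact List.pairwise_iff_getElem.1 hs p q hp hq hlt

theorem pvInv_ilt {S : List (Int × Int × Int)} {E N : Nat} {twot : Int} {G : List (List Int)}
    {i j : Nat} (htw : 0 ≤ twot) (hinv : pvInv S E twot N G i j) (hiE : i < E) : i < j := by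
  obtain ⟨h1, h2, h3, h4, h5⟩ := hinv
  rcases Nat.eq_or_lt_of_le h1 with rfl | hlt
  · rcases h4 with rfl | h4
    · omega
    · exfalso; apply h4; omega
  · exact hlt

theorem pvWin_eq_slice {S : List (Int × Int × Int)} {E N : Nat} {twot : Int} {G : List (List Int)}
    {i j : Nat} (hE : E = S.length) (hs : S.Pairwise (fun a b => a.2.2 ≤ b.2.2))
    (hinv : pvInv S E twot N G i j) :
    pvWin S twot i = pvSlice S i j := by
  obtain ⟨h1, h2, h3, h4, h5⟩ := hinv
  rw [pvWin, filter_eq_takeWhile _ _ _ (hs.sublist (List.drop_sublist i S))]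
  rw [pvSlice]
  apply takeWhile_eq_take _ (0,0,0) _ (j - i)
  · simp only [List.length_drop]; omega
  · intro k hk
    rw [getD_drop]
    simp only [decide_eq_true_eq]
    exact h3 (i+k) (by omega) (by omega)
  · rcases h4 with rfl | h4
    · left; simp only [List.length_drop]; omega
    · right
      rw [getD_drop]
      simp only [decide_eq_false_iff_not]
      rw [show i + (j - i) = j by omega]
      exact h4

theorem pvSlice_append {S : List (Int × Int × Int)} {a b c : Nat} (hab : a ≤ b) (hbc : b ≤ c) :
    pvSlice S a b ++ pvSlice S b c = pvSlice S a c := by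
  rw [pvSlice, pvSlice, pvSlice]
  rw [show c - a = (b - a) + (c - b) by omega, List.take_add]
  congr 1
  rw [List.drop_drop]
  rw [show a + (b - a) = b from by omega]

theorem pvAddEdges_append (G : List (List Int)) (l1 l2 : List (Int × Int × Int)) :
    pvAddEdges G (l1 ++ l2) = pvAddEdges (pvAddEdges G l1) l2 := by
  rw [pvAddEdges, pvAddEdges, pvAddEdges, List.foldl_append]

theorem getD_mem {S : List (Int × Int × Int)} {p : Nat} (hp : p < S.length) :
    S.getD p (0,0,0) ∈ S := by
  rw [List.getD_eq_getElem?_getD, List.getElem?_eq_getElem hp]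
  exact List.getElem_mem hp

theorem pvStep {S : List (Int × Int × Int)} {E N : Nat} {twot : Int}
    (hE : E = S.length) (hs : S.Pairwise (fun a b => a.2.2 ≤ b.2.2))
    (hend : ∀ e ∈ S, pvOkE N e) (htw : 0 ≤ twot)
    {G : List (List Int)} {i j : Nat} (hinv : pvInv S E twot N G i j) (hiE : i < E) :
    pvInv S E twot N
      (pvAddLoop S E twot ((S.getD (i+1) (0,0,0)).2.2) (E - j)
        (pvRemoveEdge G (S.getD i (0,0,0)).1 (S.getD i (0,0,0)).2.1) j false).1
      (i+1)
      (pvAddLoop S E twot ((S.getD (i+1) (0,0,0)).2.2) (E - j)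
        (pvRemoveEdge G (S.getD i (0,0,0)).1 (S.getD i (0,0,0)).2.1) j false).2.1 ∧
    ((pvAddLoop S E twot ((S.getD (i+1) (0,0,0)).2.2) (E - j)
        (pvRemoveEdge G (S.getD i (0,0,0)).1 (S.getD i (0,0,0)).2.1) j false).2.2 = false →
      ∀ f ∈ pvSlice S (i+1)
        (pvAddLoop S E twot ((S.getD (i+1) (0,0,0)).2.2) (E - j)
          (pvRemoveEdge G (S.getD i (0,0,0)).1 (S.getD i (0,0,0)).2.1) j false).2.1,
        f ∈ pvSlice S i j) := by
  have hij : i < j := pvInv_ilt htw hinv hiE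
  obtain ⟨h1, h2, h3, h4, h5⟩ := hinv
  have hslice : pvSlice S i j = S.getD i (0,0,0) :: pvSlice S (i+1) j :=
    pvSlice_cons hij (by omega)
  have hrem : pvRemoveEdge G (S.getD i (0,0,0)).1 (S.getD i (0,0,0)).2.1
      = pvAddEdges (pvG0 N) (pvSlice S (i+1) j) := by
    rw [h5, hslice]
    exact pvRemoveEdge_addEdges (hend _ (getD_mem (by omega)))
      (fun f hf => hend f (pvSlice_subset f (hslice ▸ List.mem_cons_of_mem _ hf)))
  obtain ⟨j', heq, hj1, hj2, hall, hendc⟩ :=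
    pvAddLoop_spec hE (E - j)
      (pvRemoveEdge G (S.getD i (0,0,0)).1 (S.getD i (0,0,0)).2.1) j false h2 (le_refl _)
  rw [heq]
  simp only [Bool.false_or]
  constructor
  · refine ⟨by omega, hj2, ?_, ?_, ?_⟩
    · intro k hk1 hk2
      by_cases hkj : k < j
      · have hmono : (S.getD i (0,0,0)).2.2 ≤ (S.getD (i+1) (0,0,0)).2.2 :=
          getD_mono hs (by omega) (by omega)
        have := h3 k (by omega) hkj
        omega
      · exact hall k (by omega) hk2
    · exact hendc
    · rw [hrem]
      rw [← pvAddEdges_append _ _ _, pvSlice_append (by omega) hj1]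
  · intro hfl
    have hjj : j' = j := by
      rcases Nat.eq_or_lt_of_le hj1 with h | h
      · omega
      · exfalso
        rw [decide_eq_false_iff_not] at hfl
        omega
    subst hjj
    intro f hf
    rw [hslice]
    exact List.mem_cons_of_mem _ hf

theorem pvMainLoop_zero (S : List (Int × Int × Int)) (E : Nat) (x y twot : Int)
    (G : List (List Int)) (i j : Nat) (flag bfsf : Bool) :
    pvMainLoop S E x y twot 0 G i j flag bfsf = flag := rfl

theorem pvMainLoop_succ (S : List (Int × Int × Int)) (E : Nat) (x y twot : Int) (fuel : Nat)
    (G : List (List Int)) (i j : Nat) (flag bfsf : Bool) :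
    pvMainLoop S E x y twot (fuel+1) G i j flag bfsf =
      if ¬flag ∧ j < E + 1 ∧ i < E then
        pvMainLoop S E x y twot fuel
          (pvAddLoop S E twot ((S.getD (i+1) (0,0,0)).2.2) (E - j)
            (pvRemoveEdge G (S.getD i (0,0,0)).1 (S.getD i (0,0,0)).2.1) j false).1
          (i+1)
          (pvAddLoop S E twot ((S.getD (i+1) (0,0,0)).2.2) (E - j)
            (pvRemoveEdge G (S.getD i (0,0,0)).1 (S.getD i (0,0,0)).2.1) j false).2.1
          (if bfsf ∧ pvLGet G y ≠ [] ∧ pvLGet G x ≠ [] then (pvBFS G x y, false) else (flag, bfsf)).1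
          (if (pvAddLoop S E twot ((S.getD (i+1) (0,0,0)).2.2) (E - j)
              (pvRemoveEdge G (S.getD i (0,0,0)).1 (S.getD i (0,0,0)).2.1) j false).2.2 then true
           else (if bfsf ∧ pvLGet G y ≠ [] ∧ pvLGet G x ≠ [] then (pvBFS G x y, false) else (flag, bfsf)).2)
      else flag := rfl

theorem pvMainLoop_flag_true (S : List (Int × Int × Int)) (E : Nat) (x y twot : Int)
    (fuel : Nat) (G : List (List Int)) (i j : Nat) (bfsf : Bool) :
    pvMainLoop S E x y twot fuel G i j true bfsf = true := by
  cases fuel with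
  | zero => rfl
  | succ fuel =>
    rw [pvMainLoop_succ]
    simp

theorem pvAdjE_to_adjS {N : Nat} {es : List (Int × Int × Int)} {u v : Int}
    (h : pvAdjE es u v) : pvAdjS N es u v := by
  obtain ⟨e, he, ⟨h1, h2⟩ | ⟨h1, h2⟩⟩ := h
  · exact ⟨e, he, Or.inl ⟨by rw [h1], h2⟩⟩
  · exact ⟨e, he, Or.inr ⟨by rw [h2], h1⟩⟩

theorem pvBucket_reach_iff {S : List (Int × Int × Int)} {N : Nat}
    (hend : ∀ e ∈ S, pvOkE N e)
    {G : List (List Int)} {i j : Nat}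
    (hG : G = pvAddEdges (pvG0 N) (pvSlice S i j))
    {x y : Int} (hx : pvInRng N x) (hy : pvInRng N y) :
    (pvBFS G x y = true ↔
      pvReach ((pvSlice S i j).map (pvNormE N)) (pvNorm N x) (pvNorm N y)) := by
  have hesl : ∀ e ∈ pvSlice S i j, pvOkE N e := fun e he => hend e (pvSlice_subset e he)
  have hGlen : G.length = N := by rw [hG, length_pvAddEdges]; simp [pvG0]
  have hGr : ∀ (u : Int), ∀ v ∈ pvLGet G u, pvInRng N v := by
    intro u v hv
    rw [hG, lget_pvAddEdges_G0 hesl, mem_pvContrib] at hv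
    obtain ⟨e, he, hor⟩ := hv
    rcases hor with ⟨hh1, hh2⟩ | ⟨hh1, hh2⟩
    · exact hh2 ▸ (hesl e he).2
    · exact hh2 ▸ (hesl e he).1
  have hGnlen : (pvAddEdges (pvG0 N) ((pvSlice S i j).map (pvNormE N))).length = N := by
    rw [length_pvAddEdges]; simp [pvG0]
  have hcorr : ∀ u : Int, pvLGet (pvAddEdges (pvG0 N) ((pvSlice S i j).map (pvNormE N))) u
      = (pvLGet G u).map (pvNorm N) := by
    intro u
    rw [hG]
    exact lget_norm_graph hesl u
  rw [← pvBFS_map hGlen hGnlen hcorr hGr hx hy]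
  have hesn : ∀ e ∈ (pvSlice S i j).map (pvNormE N),
      0 ≤ e.1 ∧ e.1 < (N:Int) ∧ 0 ≤ e.2.1 ∧ e.2.1 < (N:Int) := by
    intro e he
    obtain ⟨f, hf, rfl⟩ := List.mem_map.1 he
    exact ⟨pvNorm_nonneg (hesl f hf).1, pvNorm_lt (hesl f hf).1,
      pvNorm_nonneg (hesl f hf).2, pvNorm_lt (hesl f hf).2⟩
  have hGnb : ∀ (u : Int), 0 ≤ u →
      ∀ v ∈ pvLGet (pvAddEdges (pvG0 N) ((pvSlice S i j).map (pvNormE N))) u,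
        0 ≤ v ∧ v < ((pvAddEdges (pvG0 N) ((pvSlice S i j).map (pvNormE N))).length : Int) := by
    intro u _ v hv
    rw [lget_pvAddEdges_G0 (fun f hf => by
        obtain ⟨e, he, rfl⟩ := List.mem_map.1 hf
        exact pvOkE_normE (hesl e he)), mem_pvContrib] at hv
    obtain ⟨e, he, hor⟩ := hv
    obtain ⟨e1, e2, e3, e4⟩ := hesn e he
    rw [hGnlen]
    rcases hor with ⟨hh1, hh2⟩ | ⟨hh1, hh2⟩
    · exact hh2 ▸ ⟨e3, e4⟩
    · exact hh2 ▸ ⟨e1, e2⟩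
  rw [pvBFS_iff hGnb (pvNorm_nonneg hx) (by rw [hGnlen]; exact pvNorm_lt hx)
    (pvNorm_nonneg hy) (by rw [hGnlen]; exact pvNorm_lt hy)]
  exact rchG_iff_reach hesn (pvNorm_nonneg hx) (pvNorm_lt hx) _

theorem pvBucket_empty_not_reach {S : List (Int × Int × Int)} {N : Nat}
    (hend : ∀ e ∈ S, pvOkE N e)
    {G : List (List Int)} {i j : Nat}
    (hG : G = pvAddEdges (pvG0 N) (pvSlice S i j))
    {x y : Int} (hx : pvInRng N x) (hy : pvInRng N y)
    (hxy : pvNorm N x ≠ pvNorm N y)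
    (hor : pvLGet G x = [] ∨ pvLGet G y = []) :
    ¬ pvReach ((pvSlice S i j).map (pvNormE N)) (pvNorm N x) (pvNorm N y) := by
  have hesl : ∀ e ∈ pvSlice S i j, pvOkE N e := fun e he => hend e (pvSlice_subset e he)
  have hGlen : G.length = N := by rw [hG, length_pvAddEdges]; simp [pvG0]
  have hcorr : ∀ u : Int, pvLGet (pvAddEdges (pvG0 N) ((pvSlice S i j).map (pvNormE N))) u
      = (pvLGet G u).map (pvNorm N) := by
    intro u
    rw [hG]
    exact lget_norm_graph hesl u
  have hbkt : ∀ u : Int, pvInRng N u →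
      pvLGet (pvAddEdges (pvG0 N) ((pvSlice S i j).map (pvNormE N))) (pvNorm N u)
        = (pvLGet G u).map (pvNorm N) := by
    intro u hu
    rw [hcorr (pvNorm N u)]
    congr 1
    rw [hG]
    rw [show pvLGet (pvAddEdges (pvG0 N) (pvSlice S i j)) (pvNorm N u)
        = pvLGet (pvAddEdges (pvG0 N) (pvSlice S i j)) u from
      lget_idx_eq (by
        rw [show (pvAddEdges (pvG0 N) (pvSlice S i j)).length = N from by
          rw [length_pvAddEdges]; simp [pvG0]]
        exact pvIdx_norm hu)]
  have hmapok : ∀ f ∈ (pvSlice S i j).map (pvNormE N), pvOkE N f := by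
    intro f hf
    obtain ⟨e, he, rfl⟩ := List.mem_map.1 hf
    exact pvOkE_normE (hesl e he)
  intro hr
  rcases hor with hempty | hempty
  · obtain ⟨b, hb⟩ := pvReach_first hr hxy
    have : b ∈ pvLGet (pvAddEdges (pvG0 N) ((pvSlice S i j).map (pvNormE N))) (pvNorm N x) := by
      rw [lget_pvAddEdges_G0 hmapok, mem_pvContrib]
      exact pvAdjE_to_adjS hb
    rw [hbkt x hx, hempty] at this
    cases this
  · obtain ⟨a, ha⟩ := pvReach_last hr hxy
    have : a ∈ pvLGet (pvAddEdges (pvG0 N) ((pvSlice S i j).map (pvNormE N))) (pvNorm N y) := by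
      rw [lget_pvAddEdges_G0 hmapok, mem_pvContrib]
      exact pvAdjE_to_adjS (pvAdjE_symm ha)
    rw [hbkt y hy, hempty] at this
    cases this

theorem pvIfFlag_false {b c : Bool} (h : (if b = true then true else c) = false) :
    b = false ∧ c = false := by
  cases b <;> simp_all

theorem pvMainNeq {S : List (Int × Int × Int)} {E N : Nat} {twot x y : Int}
    (hE : E = S.length) (hs : S.Pairwise (fun a b => a.2.2 ≤ b.2.2))
    (hend : ∀ e ∈ S, pvOkE N e) (htw : 0 ≤ twot)
    (hx : pvInRng N x) (hy : pvInRng N y) (hxy : pvNorm N x ≠ pvNorm N y) :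
    ∀ (fuel : Nat) (G : List (List Int)) (i j : Nat) (bfsf : Bool),
    E ≤ fuel + i → pvInv S E twot N G i j →
    (bfsf = false → ¬ pvReach ((pvSlice S i j).map (pvNormE N)) (pvNorm N x) (pvNorm N y)) →
    (pvMainLoop S E x y twot fuel G i j false bfsf = true ↔
      ∃ k, i ≤ k ∧ k < E ∧ pvReach ((pvWin S twot k).map (pvNormE N)) (pvNorm N x) (pvNorm N y)) := by
  intro fuel
  induction fuel with
  | zero =>
    intro G i j bfsf hfuel hinv hbf
    rw [pvMainLoop_zero]
    simp only [Bool.false_eq_true, false_iff]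
    rintro ⟨k, hk1, hk2, _⟩
    omega
  | succ fuel ih =>
    intro G i j bfsf hfuel hinv hbf
    by_cases hiE : i < E
    · rw [pvMainLoop_succ]
      rw [if_pos (by refine ⟨by simp, by have := hinv.2.1; omega, hiE⟩)]
      have hwin : pvWin S twot i = pvSlice S i j := pvWin_eq_slice hE hs hinv
      obtain ⟨hinv', hsub⟩ := pvStep hE hs hend htw hinv hiE
      have hbfs_iff := pvBucket_reach_iff hend hinv.2.2.2.2 hx hy
      have hsplit : (∃ k, i ≤ k ∧ k < E ∧
            pvReach ((pvWin S twot k).map (pvNormE N)) (pvNorm N x) (pvNorm N y)) ↔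
          (pvReach ((pvSlice S i j).map (pvNormE N)) (pvNorm N x) (pvNorm N y) ∨
            ∃ k, i+1 ≤ k ∧ k < E ∧
              pvReach ((pvWin S twot k).map (pvNormE N)) (pvNorm N x) (pvNorm N y)) := by
        constructor
        · rintro ⟨k, hk1, hk2, hk3⟩
          rcases Nat.eq_or_lt_of_le hk1 with rfl | hk1
          · left; rwa [hwin] at hk3
          · right; exact ⟨k, hk1, hk2, hk3⟩
        · rintro (h | ⟨k, hk1, hk2, hk3⟩)
          · exact ⟨i, le_refl i, hiE, by rwa [hwin]⟩
          · exact ⟨k, by omega, hk2, hk3⟩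
      have hsubmap : (pvAddLoop S E twot ((S.getD (i+1) (0,0,0)).2.2) (E - j)
            (pvRemoveEdge G (S.getD i (0,0,0)).1 (S.getD i (0,0,0)).2.1) j false).2.2 = false →
          ¬ pvReach ((pvSlice S i j).map (pvNormE N)) (pvNorm N x) (pvNorm N y) →
          ¬ pvReach ((pvSlice S (i+1)
              (pvAddLoop S E twot ((S.getD (i+1) (0,0,0)).2.2) (E - j)
                (pvRemoveEdge G (S.getD i (0,0,0)).1 (S.getD i (0,0,0)).2.1) j false).2.1).map
              (pvNormE N)) (pvNorm N x) (pvNorm N y) := by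
        intro hadd hnr hr
        apply hnr
        apply pvReach_mono _ hr
        intro f hf
        obtain ⟨e, he, rfl⟩ := List.mem_map.1 hf
        exact List.mem_map_of_mem (hsub hadd e he)
      by_cases hg : bfsf = true ∧ pvLGet G y ≠ [] ∧ pvLGet G x ≠ []
      · rw [if_pos (by simpa using hg)]
        by_cases hreach : pvReach ((pvSlice S i j).map (pvNormE N)) (pvNorm N x) (pvNorm N y)
        · have hbt : pvBFS G x y = true := hbfs_iff.2 hreach
          simp only [hbt]
          rw [pvMainLoop_flag_true]
          simp only [true_iff]
          exact hsplit.2 (Or.inl hreach)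
        · have hbt : pvBFS G x y = false := by
            rcases Bool.eq_false_or_eq_true (pvBFS G x y) with h | h
            · exact absurd (hbfs_iff.1 h) hreach
            · exact h
          simp only [hbt]
          rw [hsplit]
          simp only [hreach, false_or]
          apply ih _ (i+1) _ _ (by omega) hinv'
          intro hbf'
          exact hsubmap (pvIfFlag_false hbf').1 hreach
      · rw [if_neg (by simpa using hg)]
        have hreach : ¬ pvReach ((pvSlice S i j).map (pvNormE N)) (pvNorm N x) (pvNorm N y) := by
          rcases Bool.eq_false_or_eq_true bfsf with hb | hb
          · rcases Decidable.em (pvLGet G x = []) with he | he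
            · exact pvBucket_empty_not_reach hend hinv.2.2.2.2 hx hy hxy (Or.inl he)
            · rcases Decidable.em (pvLGet G y = []) with he2 | he2
              · exact pvBucket_empty_not_reach hend hinv.2.2.2.2 hx hy hxy (Or.inr he2)
              · exact absurd ⟨hb, he2, he⟩ hg
          · exact hbf hb
        rw [hsplit]
        simp only [hreach, false_or]
        apply ih _ (i+1) _ _ (by omega) hinv'
        intro hbf'
        exact hsubmap (pvIfFlag_false hbf').1 hreach
    · rw [pvMainLoop_succ]
      rw [if_neg (by intro h; exact hiE h.2.2)]
      simp only [Bool.false_eq_true, false_iff]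
      rintro ⟨k, hk1, hk2, _⟩
      omega

theorem pvMainEq1 {S : List (Int × Int × Int)} {E N : Nat} {twot x y : Int}
    (hE : E = S.length) (hs : S.Pairwise (fun a b => a.2.2 ≤ b.2.2))
    (hend : ∀ e ∈ S, pvOkE N e) (htw : 0 ≤ twot)
    (hx : pvInRng N x) (hxy : pvIdx N x = pvIdx N y) :
    ∀ (fuel : Nat) (G : List (List Int)) (i j p : Nat),
    E ≤ fuel + i → pvInv S E twot N G i j → i ≤ p → p < E →
    (pvIdx N (S.getD p (0,0,0)).1 = pvIdx N x ∨ pvIdx N (S.getD p (0,0,0)).2.1 = pvIdx N x) →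
    pvMainLoop S E x y twot fuel G i j false true = true := by
  intro fuel
  induction fuel with
  | zero =>
    intro G i j p hfuel hinv hip hpE hinc
    omega
  | succ fuel ih =>
    intro G i j p hfuel hinv hip hpE hinc
    have hiE : i < E := by omega
    have hij : i < j := pvInv_ilt htw hinv hiE
    have hGlen : G.length = N := by
      rw [hinv.2.2.2.2, length_pvAddEdges]; simp [pvG0]
    rw [pvMainLoop_succ]
    rw [if_pos (by refine ⟨by simp, by have := hinv.2.1; omega, hiE⟩)]
    obtain ⟨hinv', _⟩ := pvStep hE hs hend htw hinv hiE
    by_cases hgx : pvLGet G x = []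
    · have hip' : i < p := by
        rcases Nat.eq_or_lt_of_le hip with rfl | h
        · exfalso
          have hcons : pvSlice S i j = S.getD i (0,0,0) :: pvSlice S (i+1) j :=
            pvSlice_cons hij (hE ▸ hiE)
          have hmem : S.getD i (0,0,0) ∈ pvSlice S i j := by
            rw [hcons]; exact List.mem_cons_self
          have hesl : ∀ e ∈ pvSlice S i j, pvOkE N e :=
            fun e he => hend e (pvSlice_subset e he)
          rcases hinc with h1 | h1
          · have hmm : (S.getD i (0,0,0)).2.1 ∈ pvLGet G x := by
              rw [hinv.2.2.2.2, lget_pvAddEdges_G0 hesl, mem_pvContrib]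
              exact ⟨S.getD i (0,0,0), hmem, Or.inl ⟨h1, rfl⟩⟩
            rw [hgx] at hmm
            cases hmm
          · have hmm : (S.getD i (0,0,0)).1 ∈ pvLGet G x := by
              rw [hinv.2.2.2.2, lget_pvAddEdges_G0 hesl, mem_pvContrib]
              exact ⟨S.getD i (0,0,0), hmem, Or.inr ⟨h1, rfl⟩⟩
            rw [hgx] at hmm
            cases hmm
        · exact h
      have hgy : pvLGet G y = [] := by
        rw [show pvLGet G y = pvLGet G x from lget_idx_eq (by rw [hGlen]; exact hxy.symm)]
        exact hgx
      rw [if_neg (by intro h; exact h.2.2 hgx)]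
      have hbody : ∀ b : Bool, (if b then true else (false, true).2) = true := by
        intro b; cases b <;> rfl
      rw [hbody]
      exact ih _ (i+1) _ p (by omega) hinv' (by omega) hpE hinc
    · have hgy : pvLGet G y ≠ [] := by
        rw [show pvLGet G y = pvLGet G x from lget_idx_eq (by rw [hGlen]; exact hxy.symm)]
        exact hgx
      rw [if_pos ⟨rfl, hgy, hgx⟩]
      have hbfs : pvBFS G x y = true :=
        pvBFS_self (by rw [hGlen]; exact hx) (by rw [hGlen]; exact hxy)
      simp only [hbfs]
      rw [pvMainLoop_flag_true]

theorem pvMainD {S : List (Int × Int × Int)} {E N : Nat} {twot x y : Int}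
    (hE : E = S.length) (hs : S.Pairwise (fun a b => a.2.2 ≤ b.2.2))
    (hend : ∀ e ∈ S, pvOkE N e) (htw : 0 ≤ twot)
    (hiso : ∀ e ∈ S, pvIdx N e.1 ≠ pvIdx N x ∧ pvIdx N e.2.1 ≠ pvIdx N x) :
    ∀ (fuel : Nat) (G : List (List Int)) (i j : Nat) (bfsf : Bool),
    pvInv S E twot N G i j →
    pvMainLoop S E x y twot fuel G i j false bfsf = false := by
  intro fuel
  induction fuel with
  | zero => intro G i j bfsf _; rfl
  | succ fuel ih =>
    intro G i j bfsf hinv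
    by_cases hiE : i < E
    · rw [pvMainLoop_succ]
      rw [if_pos (by refine ⟨by simp, by have := hinv.2.1; omega, hiE⟩)]
      have hesl : ∀ e ∈ pvSlice S i j, pvOkE N e :=
        fun e he => hend e (pvSlice_subset e he)
      have hgx : pvLGet G x = [] := by
        rw [hinv.2.2.2.2, lget_pvAddEdges_G0 hesl]
        rcases hh : pvContrib N (pvSlice S i j) x with _ | ⟨v, rest⟩
        · rfl
        · exfalso
          have : v ∈ pvContrib N (pvSlice S i j) x := by rw [hh]; exact List.mem_cons_self
          rw [mem_pvContrib] at this
          obtain ⟨e, he, hor⟩ := this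
          have := hiso e (pvSlice_subset e he)
          rcases hor with ⟨h1, _⟩ | ⟨h1, _⟩
          · exact this.1 h1
          · exact this.2 h1
      rw [if_neg (by intro h; exact h.2.2 hgx)]
      obtain ⟨hinv', _⟩ := pvStep hE hs hend htw hinv hiE
      have hbody : ∀ b : Bool, (if b then true else (false, bfsf).2) = (if b then true else bfsf) := by
        intro b; cases b <;> rfl
      rw [hbody]
      exact ih _ (i+1) _ _ hinv'
    · rw [pvMainLoop_succ]
      rw [if_neg (by intro h; exact hiE h.2.2)]

theorem pvIdx_eq_iff_norm_eq {N : Nat} {a b : Int} (ha : pvInRng N a) (hb : pvInRng N b) :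
    pvIdx N a = pvIdx N b ↔ pvNorm N a = pvNorm N b := by
  obtain ⟨ha1, ha2⟩ := ha
  obtain ⟨hb1, hb2⟩ := hb
  rw [pvIdx, pvIdx, pvNorm, pvNorm]
  split_ifs <;> omega

theorem pvEmodNorm {N : Nat} (v : Int) (h1 : -(N:Int) ≤ v) (h2 : v < (N:Int)) (h3 : 0 < N) :
    v % (N:Int) = pvNorm N v := by
  rw [pvNorm]
  split_ifs with h
  · have h4 : (v + (N:Int)) % (N:Int) = v % (N:Int) := by
      have := Int.add_mul_emod_self_left (a := v) (b := (N:Int)) (c := 1)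
      simpa using this
    rw [← h4, Int.emod_eq_of_lt (by omega) (by omega)]
  · rw [Int.emod_eq_of_lt (by omega) (by omega)]

-- the greatest second component of L, as Python's n = max(u[1] for u in L) ([] : dead default)
def pvNBound (L : List (Int × Int × Int)) (x y : Int) : Int :=
  max (max ((L.map (fun u => u.2.1)).foldl max ((L.map (fun u => u.2.1)).headD 0)) y) x

theorem pvNBound_eq {L : List (Int × Int × Int)} (hL : L ≠ []) (x y : Int) :
    pvNBound L x y = max (max ((PySem.List.max? (L.map (fun u => u.2.1)) (fun v => v)).getD 0) y) x := by
  cases L with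
  | nil => exact absurd rfl hL
  | cons a L' =>
    rw [pvNBound]
    have hmap : (a :: L').map (fun u => u.2.1) = a.2.1 :: L'.map (fun u => u.2.1) := rfl
    rw [hmap, PySem.List.max?_id_cons]
    simp only [Option.getD_some, List.headD_cons, List.foldl_cons, max_self]

theorem pvNBound_bounds {L : List (Int × Int × Int)} (hL : L ≠ []) (x y : Int) :
    x ≤ pvNBound L x y ∧ y ≤ pvNBound L x y ∧ ∀ e ∈ L, e.2.1 ≤ pvNBound L x y := by
  rw [pvNBound_eq hL x y]
  refine ⟨le_max_right _ x, le_trans (le_max_right _ y) (le_max_left _ x), ?_⟩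
  intro e he
  rcases hm : PySem.List.max? (L.map (fun u => u.2.1)) (fun v => v) with _ | m
  · rw [PySem.List.max?_eq_none_iff, List.map_eq_nil_iff] at hm
    exact absurd hm hL
  · have hmem : e.2.1 ∈ L.map (fun u => u.2.1) := List.mem_map.2 ⟨e, he, rfl⟩
    have := PySem.List.max?_isMax hm _ hmem
    calc e.2.1 ≤ m := this
      _ = (PySem.List.max? (L.map (fun u => u.2.1)) (fun v => v)).getD 0 := by rw [hm]; rfl
      _ ≤ _ := le_trans (le_max_left _ y) (le_max_left _ x)

theorem pvNBound_mem {L : List (Int × Int × Int)} (hL : L ≠ []) (x y : Int) :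
    pvNBound L x y ∈ x :: y :: L.map (fun e => e.2.1) := by
  rw [pvNBound_eq hL x y]
  rcases max_choice (max ((PySem.List.max? (L.map (fun u => u.2.1)) (fun v => v)).getD 0) y) x
    with h | h
  · rw [h]
    rcases max_choice ((PySem.List.max? (L.map (fun u => u.2.1)) (fun v => v)).getD 0) y with h2 | h2
    · rw [h2]
      rcases hm : PySem.List.max? (L.map (fun u => u.2.1)) (fun v => v) with _ | m
      · rw [PySem.List.max?_eq_none_iff, List.map_eq_nil_iff] at hm
        exact absurd hm hL
      · have hmm := PySem.List.max?_mem hm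
        rw [hm, show (some m).getD 0 = m from rfl]
        exact List.mem_cons_of_mem _ (List.mem_cons_of_mem _ hmm)
    · rw [h2]
      exact List.mem_cons_of_mem _ List.mem_cons_self
  · rw [h]
    exact List.mem_cons_self

theorem pvTopOf_unique {L : List (Int × Int × Int)} (hL : L ≠ []) {x y n : Int}
    (h : pvTopOf L x y n) : n = pvNBound L x y := by
  obtain ⟨h1, h2, h3, h4⟩ := h
  obtain ⟨b1, b2, b3⟩ := pvNBound_bounds hL x y
  apply le_antisymm
  · rcases h4 with rfl | rfl | ⟨e, he, rfl⟩
    · exact b1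
    · exact b2
    · exact b3 e he
  · rcases List.mem_cons.1 (pvNBound_mem hL x y) with hq | hq
    · rw [hq]; exact h1
    · rcases List.mem_cons.1 hq with hq | hq
      · rw [hq]; exact h2
      · obtain ⟨e, he, hq⟩ := List.mem_map.1 hq
        exact hq ▸ h3 e he

theorem pvTopOf_pvNBound {L : List (Int × Int × Int)} (hL : L ≠ []) (x y : Int) :
    pvTopOf L x y (pvNBound L x y) := by
  obtain ⟨b1, b2, b3⟩ := pvNBound_bounds hL x y
  refine ⟨b1, b2, b3, ?_⟩
  rcases List.mem_cons.1 (pvNBound_mem hL x y) with hq | hq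
  · exact Or.inl hq
  · rcases List.mem_cons.1 hq with hq | hq
    · exact Or.inr (Or.inl hq)
    · obtain ⟨e, he, hq⟩ := List.mem_map.1 hq
      exact Or.inr (Or.inr ⟨e, he, hq⟩)

-- ---------- B side: the relaxation sweeps compute slot reachability ----------
theorem getD_true_lt {s : List Bool} {q : Nat} (h : s.getD q false = true) : q < s.length := by
  by_contra hq
  rw [List.getD_eq_getElem?_getD, List.getElem?_eq_none (by omega)] at h
  cases h

theorem set_true_getD_mono {s : List Bool} {i q : Nat} (h : s.getD q false = true) :
    (s.set i true).getD q false = true := by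
  have hq : q < s.length := getD_true_lt h
  by_cases hiq : i = q
  · subst hiq
    rw [List.getD_eq_getElem?_getD, List.getElem?_set_self',
      List.getElem?_eq_getElem (by simpa using hq)]
    rfl
  · rw [List.getD_eq_getElem?_getD, List.getElem?_set_ne hiq, ← List.getD_eq_getElem?_getD]
    exact h

theorem getD_set_true_self {s : List Bool} {i : Nat} (hi : i < s.length) :
    (s.set i true).getD i false = true := by
  rw [List.getD_eq_getElem?_getD, List.getElem?_set_self',
    List.getElem?_eq_getElem (by simpa using hi)]
  rfl

theorem getD_set_true_cases {s : List Bool} {i p : Nat} (h : (s.set i true).getD p false = true) :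
    p = i ∨ s.getD p false = true := by
  by_cases hp : p = i
  · exact Or.inl hp
  · right
    rwa [List.getD_eq_getElem?_getD, List.getElem?_set_ne (fun hh => hp hh.symm),
      ← List.getD_eq_getElem?_getD] at h

theorem getD_replicate_false (N p : Nat) : (List.replicate N false).getD p false = false := by
  rw [List.getD_eq_getElem?_getD, List.getElem?_replicate]
  split_ifs <;> rfl

theorem cast_pvIdx {N : Nat} {v : Int} (h0 : 0 ≤ v) : ((pvIdx N v : Nat) : Int) = v := by
  rw [pvIdx, if_neg (by omega)]
  omega

theorem cast_pvIdx_norm {N : Nat} {v : Int} (h : pvInRng N v) :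
    ((pvIdx N v : Nat) : Int) = pvNorm N v := by
  obtain ⟨h1, h2⟩ := h
  rw [pvIdx, pvNorm]
  split_ifs <;> omega

theorem relaxA_getD_mono {N : Nat} {s : List Bool} {e : Int × Int × Int} {q : Nat}
    (h : s.getD q false = true) : (pvRelaxA N s e).getD q false = true := by
  rw [pvRelaxA]
  split_ifs
  · exact set_true_getD_mono h
  · exact h

theorem relaxB_getD_mono {N : Nat} {s : List Bool} {e : Int × Int × Int} {q : Nat}
    (h : s.getD q false = true) : (pvRelaxB N s e).getD q false = true := by
  rw [pvRelaxB]
  split_ifs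
  · exact set_true_getD_mono h
  · exact h

theorem relax_getD_mono {N : Nat} {s : List Bool} {e : Int × Int × Int} {q : Nat}
    (h : s.getD q false = true) : (pvRelax N s e).getD q false = true := by
  rw [pvRelax]
  exact relaxB_getD_mono (relaxA_getD_mono h)

theorem relaxA_length {N : Nat} (s : List Bool) (e : Int × Int × Int) :
    (pvRelaxA N s e).length = s.length := by
  rw [pvRelaxA]; split_ifs <;> simp

theorem relaxB_length {N : Nat} (s : List Bool) (e : Int × Int × Int) :
    (pvRelaxB N s e).length = s.length := by
  rw [pvRelaxB]; split_ifs <;> simp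

theorem relax_length {N : Nat} (s : List Bool) (e : Int × Int × Int) :
    (pvRelax N s e).length = s.length := by
  rw [pvRelax, relaxB_length, relaxA_length]

theorem sweep_length {N : Nat} (w : List (Int × Int × Int)) : ∀ s : List Bool,
    (pvSweep N w s).length = s.length := by
  induction w with
  | nil => intro s; rfl
  | cons e w ih =>
    intro s
    rw [pvSweep, List.foldl_cons, ← pvSweep, ih, relax_length]

theorem sweep_getD_mono {N : Nat} (w : List (Int × Int × Int)) : ∀ {s : List Bool} {q : Nat},
    s.getD q false = true → (pvSweep N w s).getD q false = true := by
  induction w with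
  | nil => exact fun h => h
  | cons e w ih =>
    intro s q h
    rw [pvSweep, List.foldl_cons, ← pvSweep]
    exact ih (relax_getD_mono h)

theorem relax_fwd {N : Nat} {s : List Bool} {e : Int × Int × Int}
    (hb : pvIdx N e.2.1 < s.length) (h : s.getD (pvIdx N e.1) false = true) :
    (pvRelax N s e).getD (pvIdx N e.2.1) false = true := by
  rw [pvRelax, pvRelaxA, if_pos h]
  exact relaxB_getD_mono (getD_set_true_self hb)

theorem relax_bwd {N : Nat} {s : List Bool} {e : Int × Int × Int}
    (ha : pvIdx N e.1 < s.length) (h : s.getD (pvIdx N e.2.1) false = true) :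
    (pvRelax N s e).getD (pvIdx N e.1) false = true := by
  rw [pvRelax, pvRelaxB, if_pos (relaxA_getD_mono h)]
  exact getD_set_true_self (by rw [relaxA_length]; exact ha)

theorem sweep_fwd {N : Nat} (w : List (Int × Int × Int)) : ∀ (s : List Bool), ∀ e ∈ w,
    pvIdx N e.1 < s.length → pvIdx N e.2.1 < s.length →
    ((s.getD (pvIdx N e.1) false = true → (pvSweep N w s).getD (pvIdx N e.2.1) false = true) ∧
     (s.getD (pvIdx N e.2.1) false = true → (pvSweep N w s).getD (pvIdx N e.1) false = true)) := by
  induction w with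
  | nil => intro s e he; cases he
  | cons f w ih =>
    intro s e he ha hb
    rw [pvSweep, List.foldl_cons, ← pvSweep]
    rcases List.mem_cons.1 he with rfl | he
    · exact ⟨fun h => sweep_getD_mono w (relax_fwd hb h),
             fun h => sweep_getD_mono w (relax_bwd ha h)⟩
    · have ha' : pvIdx N e.1 < (pvRelax N s f).length := by rw [relax_length]; exact ha
      have hb' : pvIdx N e.2.1 < (pvRelax N s f).length := by rw [relax_length]; exact hb
      exact ⟨fun h => (ih (pvRelax N s f) e he ha' hb').1 (relax_getD_mono h),
             fun h => (ih (pvRelax N s f) e he ha' hb').2 (relax_getD_mono h)⟩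

theorem relax_sound {N : Nat} {W : List (Int × Int × Int)} {x' : Int} {s : List Bool}
    {e : Int × Int × Int} (hmem : e ∈ W) (he1 : 0 ≤ e.1) (he2 : 0 ≤ e.2.1)
    (hInv : ∀ p : Nat, s.getD p false = true → pvReach W x' (p:Int)) :
    ∀ p : Nat, (pvRelax N s e).getD p false = true → pvReach W x' (p:Int) := by
  have adjF : pvAdjE W e.1 e.2.1 := ⟨e, hmem, Or.inl ⟨rfl, rfl⟩⟩
  rw [pvRelax, pvRelaxB, pvRelaxA]
  by_cases h1 : s.getD (pvIdx N e.1) false = true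
  · rw [if_pos h1]
    have hr1 : pvReach W x' e.1 := by
      have := hInv _ h1
      rwa [cast_pvIdx he1] at this
    have hInv1 : ∀ p : Nat, (s.set (pvIdx N e.2.1) true).getD p false = true →
        pvReach W x' (p:Int) := by
      intro p hp
      rcases getD_set_true_cases hp with rfl | hp
      · rw [cast_pvIdx he2]
        exact pvReach.step hr1 adjF
      · exact hInv p hp
    by_cases h2 : (s.set (pvIdx N e.2.1) true).getD (pvIdx N e.2.1) false = true
    · rw [if_pos h2]
      intro p hp
      rcases getD_set_true_cases hp with rfl | hp
      · rw [cast_pvIdx he1]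
        exact hr1
      · exact hInv1 p hp
    · rw [if_neg h2]
      exact hInv1
  · rw [if_neg h1]
    by_cases h2 : s.getD (pvIdx N e.2.1) false = true
    · rw [if_pos h2]
      have hr2 : pvReach W x' e.2.1 := by
        have := hInv _ h2
        rwa [cast_pvIdx he2] at this
      intro p hp
      rcases getD_set_true_cases hp with rfl | hp
      · rw [cast_pvIdx he1]
        exact pvReach.step hr2 (pvAdjE_symm adjF)
      · exact hInv p hp
    · rw [if_neg h2]
      exact hInv

theorem sweep_sound {N : Nat} {W : List (Int × Int × Int)} {x' : Int}
    (hW : ∀ e ∈ W, 0 ≤ e.1 ∧ 0 ≤ e.2.1) :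
    ∀ (w : List (Int × Int × Int)), (∀ e ∈ w, e ∈ W) → ∀ (s : List Bool),
    (∀ p : Nat, s.getD p false = true → pvReach W x' (p:Int)) →
    ∀ p : Nat, (pvSweep N w s).getD p false = true → pvReach W x' (p:Int) := by
  intro w
  induction w with
  | nil => exact fun _ s h => h
  | cons e w ih =>
    intro hsub s hInv
    rw [pvSweep, List.foldl_cons, ← pvSweep]
    have heW : e ∈ W := hsub e List.mem_cons_self
    exact ih (fun f hf => hsub f (List.mem_cons_of_mem _ hf)) _
      (relax_sound heW (hW e heW).1 (hW e heW).2 hInv)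

theorem relax_norm {N : Nat} {s : List Bool} {e : Int × Int × Int} (he : pvOkE N e) :
    pvRelax N s (pvNormE N e) = pvRelax N s e := by
  rw [pvRelax, pvRelax, pvRelaxB, pvRelaxB, pvRelaxA, pvRelaxA]
  rw [show pvIdx N (pvNormE N e).1 = pvIdx N e.1 from pvIdx_norm he.1,
    show pvIdx N (pvNormE N e).2.1 = pvIdx N e.2.1 from pvIdx_norm he.2]

theorem sweep_norm {N : Nat} : ∀ (w : List (Int × Int × Int)), (∀ e ∈ w, pvOkE N e) →
    ∀ s : List Bool, pvSweep N (w.map (pvNormE N)) s = pvSweep N w s := by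
  intro w
  induction w with
  | nil => intro _ s; rfl
  | cons e w ih =>
    intro hok s
    rw [List.map_cons]
    show (w.map (pvNormE N)).foldl (pvRelax N) (pvRelax N s (pvNormE N e))
        = w.foldl (pvRelax N) (pvRelax N s e)
    rw [relax_norm (hok e List.mem_cons_self)]
    exact ih (fun f hf => hok f (List.mem_cons_of_mem _ hf)) _

theorem iter_sweep_length {N : Nat} (w : List (Int × Int × Int)) : ∀ (k : Nat) (s : List Bool),
    ((pvSweep N w)^[k] s).length = s.length := by
  intro k
  induction k with
  | zero => intro s; rfl
  | succ k ih =>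
    intro s
    rw [Function.iterate_succ_apply', sweep_length, ih]

theorem iter_sweep_complete {N : Nat} {w' : List (Int × Int × Int)} {x : Int}
    (hok : ∀ e ∈ w', pvOkE N e) (hx : pvInRng N x) :
    ∀ (k : Nat) (u : Int), u ∈ pvIterC w' (pvNorm N x) k →
    ((pvSweep N w')^[k] ((List.replicate N false).set (pvIdx N x) true)).getD (pvIdx N u)
      false = true := by
  intro k
  induction k with
  | zero =>
    intro u hu
    simp only [pvIterC, Function.iterate_zero_apply, PySem.Set.mem_ofList,
      List.mem_singleton] at hu
    subst hu
    simp only [Function.iterate_zero_apply]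
    rw [pvIdx_norm hx]
    exact getD_set_true_self (by rw [List.length_replicate]; exact pvIdx_lt hx)
  | succ k ih =>
    intro u hu
    rw [pvIterC, Function.iterate_succ_apply', mem_satPass] at hu
    rw [Function.iterate_succ_apply']
    have hlen : ((pvSweep N w')^[k] ((List.replicate N false).set (pvIdx N x) true)).length
        = N := by
      rw [iter_sweep_length]; simp
    rcases hu with hu | ⟨e, he, ⟨h1, rfl⟩ | ⟨h1, rfl⟩⟩
    · exact sweep_getD_mono _ (ih u hu)
    · exact (sweep_fwd w' _ e he (by rw [hlen]; exact pvIdx_lt (hok e he).1)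
        (by rw [hlen]; exact pvIdx_lt (hok e he).2)).1 (ih _ h1)
    · exact (sweep_fwd w' _ e he (by rw [hlen]; exact pvIdx_lt (hok e he).1)
        (by rw [hlen]; exact pvIdx_lt (hok e he).2)).2 (ih _ h1)

theorem iter_sweep_sound {N : Nat} {w' : List (Int × Int × Int)} {x : Int}
    (hnn : ∀ e ∈ w', 0 ≤ e.1 ∧ 0 ≤ e.2.1) (hx : pvInRng N x) :
    ∀ (k : Nat) (p : Nat),
    ((pvSweep N w')^[k] ((List.replicate N false).set (pvIdx N x) true)).getD p false = true →
    pvReach w' (pvNorm N x) (p:Int) := by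
  intro k
  induction k with
  | zero =>
    intro p hp
    simp only [Function.iterate_zero_apply] at hp
    rcases getD_set_true_cases hp with rfl | hp
    · rw [cast_pvIdx_norm hx]
      exact pvReach.refl
    · rw [getD_replicate_false] at hp
      cases hp
  | succ k ih =>
    intro p hp
    rw [Function.iterate_succ_apply'] at hp
    exact sweep_sound hnn w' (fun e he => he) _ ih p hp

theorem altCheckA_iff {N : Nat} {S : List (Int × Int × Int)} {x y t : Int} (i : Nat)
    (hok : ∀ e ∈ S, pvOkE N e) (hx : pvInRng N x) (hy : pvInRng N y) :
    (pvAltCheck N S x y t i = true ↔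
      pvReach ((pvWin S (2*t) i).map (pvNormE N)) (pvNorm N x) (pvNorm N y)) := by
  have hwok : ∀ e ∈ pvWin S (2*t) i, pvOkE N e := fun e he =>
    hok e (List.mem_of_mem_drop (List.mem_of_mem_filter he))
  have hw'nn : ∀ e ∈ (pvWin S (2*t) i).map (pvNormE N), 0 ≤ e.1 ∧ 0 ≤ e.2.1 := by
    intro e he
    obtain ⟨f, hf, rfl⟩ := List.mem_map.1 he
    exact ⟨pvNorm_nonneg (hwok f hf).1, pvNorm_nonneg (hwok f hf).2⟩
  have hw'ok : ∀ e ∈ (pvWin S (2*t) i).map (pvNormE N), pvOkE N e := by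
    intro e he
    obtain ⟨f, hf, rfl⟩ := List.mem_map.1 he
    exact pvOkE_normE (hwok f hf)
  have hfun : pvSweep N (pvWin S (2*t) i) = pvSweep N ((pvWin S (2*t) i).map (pvNormE N)) := by
    funext s
    exact (sweep_norm (pvWin S (2*t) i) hwok s).symm
  rw [show pvAltCheck N S x y t i
      = ((List.range (2 * (pvWin S (2*t) i).length + 1)).foldl
          (fun s _ => pvSweep N (pvWin S (2*t) i) s)
          ((List.replicate N false).set (pvIdx N x) true)).getD (pvIdx N y) false from rfl,
    foldl_range_const, hfun]
  constructor
  · intro h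
    have := iter_sweep_sound hw'nn hx _ _ h
    rwa [cast_pvIdx_norm hy] at this
  · intro h
    have hm := pvIterC_complete (w := (pvWin S (2*t) i).map (pvNormE N)) h
    have := iter_sweep_complete hw'ok hx _ _ hm
    rw [pvIdx_norm hy] at this
    rwa [List.length_map] at this

-- ---------- assembly ----------
theorem Flight_main (L : List (Int × Int × Int)) (x y t : Int) (hpre : Pre_Flight L x y t) :
    (¬ D_Flight L x y t → Flight L x y t = Flight_alt L x y t) ∧
    (D_Flight L x y t → Flight L x y t = false ∧ Flight_alt L x y t = true) := by
  obtain ⟨hL, ht, n', hmem', htop', hnb0', hxm', hym', hbound'0⟩ := hpre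
  have hn'eq : n' = pvNBound L x y := pvTopOf_unique hL htop'
  have hnb0 : 0 ≤ pvNBound L x y := hn'eq ▸ hnb0'
  have hxm : -(pvNBound L x y + 1) ≤ x := hn'eq ▸ hxm'
  have hym : -(pvNBound L x y + 1) ≤ y := hn'eq ▸ hym'
  have hbound : ∀ e ∈ L, -(pvNBound L x y + 1) ≤ e.1 ∧ e.1 ≤ pvNBound L x y ∧
      -(pvNBound L x y + 1) ≤ e.2.1 := hn'eq ▸ hbound'0
  set S := PySem.List.sorted L (fun e => e.2.2) false with hS
  set E := L.length with hEdef
  set n0 := (PySem.List.max? (L.map (fun u => u.2.1)) (fun v => v)).getD 0 with hn0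
  set n := max (max n0 y) x with hn
  set N := (n+1).toNat with hN
  have hnbn : pvNBound L x y = n := pvNBound_eq hL x y
  have hnn : 0 ≤ n := by rw [← hnbn]; exact hnb0
  have hNc : (N:Int) = n + 1 := by rw [hN]; omega
  have hNpos : 0 < N := by omega
  have hE' : E = S.length := by rw [hS, PySem.List.length_sorted]
  have hs : S.Pairwise (fun a b => a.2.2 ≤ b.2.2) := PySem.List.sorted_pairwise L _
  have hn21 : ∀ e ∈ L, e.2.1 ≤ n0 := by
    intro e he
    rcases hm : PySem.List.max? (L.map (fun u => u.2.1)) (fun v => v) with _ | m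
    · rw [PySem.List.max?_eq_none_iff] at hm
      rw [List.map_eq_nil_iff] at hm
      exact absurd hm hL
    · have : e.2.1 ∈ L.map (fun u => u.2.1) := List.mem_map.2 ⟨e, he, rfl⟩
      have := PySem.List.max?_isMax hm _ this
      rw [hn0, hm]
      exact this
  have hbound' : ∀ e ∈ L, -(n+1) ≤ e.1 ∧ e.1 ≤ n ∧ -(n+1) ≤ e.2.1 := by
    intro e he
    have := hbound e he
    rw [hnbn] at this
    exact this
  have hokL : ∀ e ∈ L, pvOkE N e := by
    intro e he
    obtain ⟨h1, h2, h3⟩ := hbound' e he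
    have h4 : e.2.1 ≤ n := le_trans (hn21 e he) (le_trans (le_max_left n0 y) (le_max_left _ x))
    exact ⟨⟨by omega, by omega⟩, ⟨by omega, by omega⟩⟩
  have hend : ∀ e ∈ S, pvOkE N e := by
    intro e he
    exact hokL e ((PySem.List.mem_sorted L _ false e).1 he)
  have hx : pvInRng N x := by
    have : x ≤ n := le_max_right _ x
    rw [hnbn] at hxm
    exact ⟨by omega, by omega⟩
  have hy : pvInRng N y := by
    have : y ≤ n := le_trans (le_max_right n0 y) (le_max_left _ x)
    rw [hnbn] at hym
    exact ⟨by omega, by omega⟩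
  have htw : (0:Int) ≤ 2*t := by omega
  have hFl : Flight L x y t = pvMainLoop S E x y (2*t) (E+1)
      (pvAddLoop S E (2*t) ((S.getD 0 (0,0,0)).2.2) E (pvG0 N) 0 false).1 0
      (pvAddLoop S E (2*t) ((S.getD 0 (0,0,0)).2.2) E (pvG0 N) 0 false).2.1 false true := rfl
  obtain ⟨j0, heq, hj1, hj2, hall, hendc⟩ :=
    pvAddLoop_spec (twot := 2*t) (ti := (S.getD 0 (0,0,0)).2.2) hE' E (pvG0 N) 0 false
      (Nat.zero_le E) (by omega)
  have hinv0 : pvInv S E (2*t) N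
      (pvAddLoop S E (2*t) ((S.getD 0 (0,0,0)).2.2) E (pvG0 N) 0 false).1 0
      (pvAddLoop S E (2*t) ((S.getD 0 (0,0,0)).2.2) E (pvG0 N) 0 false).2.1 := by
    rw [heq]
    exact ⟨Nat.zero_le j0, hj2, fun k hk1 hk2 => hall k hk1 hk2, hendc, rfl⟩
  have hEpos : 0 < E := by
    rw [hEdef]
    exact List.length_pos_iff.2 hL
  -- the B side
  have hBn : max (max n0 x) y = n := by rw [hn, max_right_comm]
  have hNB : (max (max n0 x) y + 1).toNat = N := by rw [hBn]
  have hAlt : Flight_alt L x y t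
      = (List.range S.length).any (fun i => pvAltCheck ((max (max n0 x) y + 1).toNat) S x y t i) :=
    rfl
  have hAlt2 : Flight_alt L x y t
      = (List.range S.length).any (fun i => pvAltCheck N S x y t i) := by
    rw [hAlt, hNB]
  have hAltIff : Flight_alt L x y t = true ↔
      ∃ i, i < E ∧ pvReach ((pvWin S (2*t) i).map (pvNormE N)) (pvNorm N x) (pvNorm N y) := by
    rw [hAlt2, List.any_eq_true]
    constructor
    · rintro ⟨i, hi, hc⟩
      rw [List.mem_range, ← hE'] at hi
      exact ⟨i, hi, (altCheckA_iff i hend hx hy).1 hc⟩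
    · rintro ⟨i, hi, hr⟩
      exact ⟨i, List.mem_range.2 (by rw [← hE']; exact hi), (altCheckA_iff i hend hx hy).2 hr⟩
  have halt_true_of_slot : pvIdx N x = pvIdx N y → Flight_alt L x y t = true := by
    intro hslot
    apply hAltIff.2
    refine ⟨0, hEpos, ?_⟩
    rw [(pvIdx_eq_iff_norm_eq hx hy).1 hslot]
    exact pvReach.refl
  have hDlink : D_Flight L x y t ↔ (pvIdx N x = pvIdx N y ∧
      ∀ e ∈ L, pvIdx N e.1 ≠ pvIdx N x ∧ pvIdx N e.2.1 ≠ pvIdx N x) := by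
    have hDnb : D_Flight L x y t ↔ (x % (n + 1) = y % (n + 1) ∧
        ∀ e ∈ L, e.1 % (n + 1) ≠ x % (n + 1) ∧ e.2.1 % (n + 1) ≠ x % (n + 1)) := by
      constructor
      · rintro ⟨n2, hmem2, htop2, hc1, hc2⟩
        have : n2 = n := by rw [pvTopOf_unique hL htop2, hnbn]
        subst this
        exact ⟨hc1, hc2⟩
      · rintro ⟨hc1, hc2⟩
        exact ⟨n, by rw [← hnbn]; exact pvNBound_mem hL x y,
          by rw [← hnbn]; exact pvTopOf_pvNBound hL x y, hc1, hc2⟩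
    rw [hDnb]
    have hrw : ∀ v : Int, -(n+1) ≤ v → v ≤ n → v % (n+1) = pvNorm N v := by
      intro v h1 h2
      rw [show n + 1 = (N:Int) from hNc.symm]
      exact pvEmodNorm v (by omega) (by omega) hNpos
    have hxe : x % (n+1) = pvNorm N x := hrw x (by rw [hnbn] at hxm; exact hxm) (le_max_right _ x)
    have hye : y % (n+1) = pvNorm N y :=
      hrw y (by rw [hnbn] at hym; exact hym) (le_trans (le_max_right n0 y) (le_max_left _ x))
    rw [hxe, hye]
    constructor
    · rintro ⟨hc1, hc2⟩
      refine ⟨(pvIdx_eq_iff_norm_eq hx hy).2 hc1, ?_⟩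
      intro e he
      obtain ⟨h1, h2, h3⟩ := hbound' e he
      have h4 : e.2.1 ≤ n := le_trans (hn21 e he) (le_trans (le_max_left n0 y) (le_max_left _ x))
      have := hc2 e he
      rw [hrw e.1 h1 h2, hrw e.2.1 h3 h4] at this
      exact ⟨fun hq => this.1 ((pvIdx_eq_iff_norm_eq (hokL e he).1 hx).1 hq),
        fun hq => this.2 ((pvIdx_eq_iff_norm_eq (hokL e he).2 hx).1 hq)⟩
    · rintro ⟨hc1, hc2⟩
      refine ⟨(pvIdx_eq_iff_norm_eq hx hy).1 hc1, ?_⟩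
      intro e he
      obtain ⟨h1, h2, h3⟩ := hbound' e he
      have h4 : e.2.1 ≤ n := le_trans (hn21 e he) (le_trans (le_max_left n0 y) (le_max_left _ x))
      have := hc2 e he
      rw [hrw e.1 h1 h2, hrw e.2.1 h3 h4]
      exact ⟨fun hq => this.1 ((pvIdx_eq_iff_norm_eq (hokL e he).1 hx).2 hq),
        fun hq => this.2 ((pvIdx_eq_iff_norm_eq (hokL e he).2 hx).2 hq)⟩
  constructor
  · intro hD
    by_cases hslot : pvIdx N x = pvIdx N y
    · -- some edge of L touches the slot of x
      have h2 : ¬ ∀ e ∈ L, pvIdx N e.1 ≠ pvIdx N x ∧ pvIdx N e.2.1 ≠ pvIdx N x :=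
        fun h => hD (hDlink.2 ⟨hslot, h⟩)
      have h3 : ∃ e ∈ L, pvIdx N e.1 = pvIdx N x ∨ pvIdx N e.2.1 = pvIdx N x := by
        by_contra h4
        apply h2
        intro e he
        constructor <;> intro hq <;> exact h4 ⟨e, he, by rw [hq]; simp [hq]⟩
      obtain ⟨e, heL, hinc⟩ := h3
      have heS : e ∈ S := (PySem.List.mem_sorted L _ false e).2 heL
      obtain ⟨p, hp, hpe⟩ := List.mem_iff_getElem.1 heS
      have hpd : S.getD p (0,0,0) = e := by
        rw [List.getD_eq_getElem?_getD, List.getElem?_eq_getElem hp]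
        exact hpe
      have hFt : Flight L x y t = true := by
        rw [hFl]
        exact pvMainEq1 hE' hs hend htw hx hslot (E+1) _ 0 _ p (by omega) hinv0
          (Nat.zero_le p) (by omega) (by rw [hpd]; exact hinc)
      rw [hFt, halt_true_of_slot hslot]
    · have hxyn : pvNorm N x ≠ pvNorm N y :=
        fun h => hslot ((pvIdx_eq_iff_norm_eq hx hy).2 h)
      have hAiff := pvMainNeq hE' hs hend htw hx hy hxyn (E+1) _ 0 _ true
        (by omega) hinv0 (by intro h; cases h)
      have hiff : Flight L x y t = true ↔ Flight_alt L x y t = true := by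
        rw [hFl, hAiff, hAltIff]
        constructor
        · rintro ⟨k, _, hk2, hk3⟩
          exact ⟨k, hk2, hk3⟩
        · rintro ⟨k, hk1, hk3⟩
          exact ⟨k, Nat.zero_le k, hk1, hk3⟩
      rcases Bool.eq_false_or_eq_true (Flight L x y t) with h | h <;>
        rcases Bool.eq_false_or_eq_true (Flight_alt L x y t) with h2 | h2
      · rw [h, h2]
      · rw [h] at hiff
        exact absurd (hiff.1 rfl) (by rw [h2]; simp)
      · rw [h2] at hiff
        exact absurd (hiff.2 rfl) (by rw [h]; simp)
      · rw [h, h2]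
  · intro hD
    obtain ⟨hslot, hiso⟩ := hDlink.1 hD
    constructor
    · rw [hFl]
      apply pvMainD hE' hs hend htw
      · intro e he
        exact hiso e ((PySem.List.mem_sorted L _ false e).1 he)
      · exact hinv0
    · exact halt_true_of_slot hslot

-- ===== VERDICT (by name: the statement is the Claim_ definition above) =====
theorem Flight_spec : Claim_unchanged_Flight := by
  intro L x y t hdom hpre hD
  exact (Flight_main L x y t hpre).1 hD
theorem Flight_changed : Claim_changed_Flight := by
  unfold Claim_changed_Flight; decide
theorem Flight_tight : Claim_exact_Flight := by
  intro L x y t hdom hpre hD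
  obtain ⟨h1, h2⟩ := (Flight_main L x y t hpre).2 hD
  rw [h1, h2]
  simp
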